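-- pv_equiv track=rewrite | github.com/Jacksonzoo/Advent-of-Code | day12/day12.py | calc_discounted_cost
-- ===== SOURCE A (Python) =====
-- def check_in_garden(x, y, garden):
--     return 0 <= x < len(garden) and 0 <= y < len(garden[0])
--
-- def get_corners(x, y, garden, plant_type):
--     directions = [
--         (-1, -1,), (-1, 0), (-1, 1),    # NW, N, NE
--         (0, -1),            (0, 1),     # W,     E
--         (1, -1),  (1, 0),   (1, 1)      # SW, S, SE
--     ]
--
--     adjacent = [
--         check_in_garden(x + dx, y+ dy, garden) and garden[x + dx][y + dy] == plant_type
--         for dx, dy in directions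
--     ]
--
--     NW, N, NE, W, E, SW, S, SE = adjacent
--     return sum([
--         N and W and not NW,
--         N and E and not NE,
--         S and W and not SW,
--         S and E and not SE,
--         not (N or W),
--         not (N or E),
--         not (S or W),
--         not (S or E)
--     ])
--
-- def find_region(x, y, garden):
--     plant_type = garden[x][y]
--     region = set()
--     queue = [(x, y)]
--
--     while queue:
--         cx, cy = queue.pop()
--         if (cx, cy) in region:
--             continue
--         region.add((cx, cy))
--
--         for dx, dy in [(-1, 0), (1, 0), (0, -1), (0, 1)]:
--             nx, ny = cx + dx, cy + dy
--             if(
--                 check_in_garden(nx, ny, garden)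
--                 and garden[nx][ny] == plant_type
--                 and (nx, ny) not in region
--                 and (nx, ny) not in queue
--             ):
--                 queue.append((nx, ny))
--
--     corners = sum(get_corners(rx, ry, garden, plant_type) for rx, ry in region)
--     return region, corners * len(region)
--
-- def calc_discounted_cost(garden):
--     visited = set()
--     total_cost = 0
--
--     for x in range(len(garden)):
--         for y in range(len(garden[0])):
--             if (x, y) not in visited:
--                 region, cost = find_region(x, y, garden)
--                 total_cost += cost
--                 visited |= region
--     return total_cost
-- ===== SOURCE B (Python) =====
-- def check_in_garden(x, y, garden):
--     return 0 <= x < len(garden) and 0 <= y < len(garden[0])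
--
-- def get_corners(x, y, garden, plant_type):
--     directions = [
--         (-1, -1,), (-1, 0), (-1, 1),    # NW, N, NE
--         (0, -1),            (0, 1),     # W,     E
--         (1, -1),  (1, 0),   (1, 1)      # SW, S, SE
--     ]
--
--     adjacent = [
--         check_in_garden(x + dx, y+ dy, garden) and garden[x + dx][y + dy] == plant_type
--         for dx, dy in directions
--     ]
--
--     NW, N, NE, W, E, SW, S, SE = adjacent
--     return sum([
--         N and W and not NW,
--         N and E and not NE,
--         S and W and not SW,
--         S and E and not SE,
--         not (N or W),
--         not (N or E),
--         not (S or W),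
--         not (S or E)
--     ])
--
-- def calc_discounted_cost(garden):
--     # global min-label propagation: no flood fill, no visited set
--     if not garden:
--         return 0
--     h, w = len(garden), len(garden[0])
--     n = h * w
--     label = list(range(n))
--     changed = True
--     while changed:
--         changed = False
--         for i in range(n):
--             x, y = i // w, i % w
--             m = label[i]
--             for dx, dy in ((-1, 0), (1, 0), (0, -1), (0, 1)):
--                 nx, ny = x + dx, y + dy
--                 if check_in_garden(nx, ny, garden) and garden[nx][ny] == garden[x][y]:
--                     j = nx * w + ny
--                     if label[j] < m:
--                         m = label[j]
--             if m < label[i]: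
--                 label[i] = m
--                 changed = True
--     area = {}
--     for i in range(n):
--         area[label[i]] = area.get(label[i], 0) + 1
--     total = 0
--     for i in range(n):
--         x, y = i // w, i % w
--         total += get_corners(x, y, garden, garden[x][y]) * area[label[i]]
--     return total
-- ===== Notes on version B (the rewrite author's own statement) =====
-- stated objective: alternative
-- what changed: Replaces the per-region stack flood fill with a visited set by a global min-label propagation over the whole grid (iterate lowering each cell's label to the minimum over same-plant 4-neighbours until a fixpoint), then one counting pass for component areas and one pass summing corners(cell) * area(component).
import Mathlib
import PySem

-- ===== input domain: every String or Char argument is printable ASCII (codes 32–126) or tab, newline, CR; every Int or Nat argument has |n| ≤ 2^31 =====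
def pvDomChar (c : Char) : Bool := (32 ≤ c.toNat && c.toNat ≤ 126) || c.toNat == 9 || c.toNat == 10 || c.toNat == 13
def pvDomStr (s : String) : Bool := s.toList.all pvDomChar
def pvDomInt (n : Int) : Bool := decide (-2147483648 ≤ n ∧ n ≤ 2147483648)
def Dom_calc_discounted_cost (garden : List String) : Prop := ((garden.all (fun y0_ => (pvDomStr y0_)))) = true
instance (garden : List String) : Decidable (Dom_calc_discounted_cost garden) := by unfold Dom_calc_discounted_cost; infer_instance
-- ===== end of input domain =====

-- B replaces A's per-region flood fill (stack + visited set) by a global min-label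
-- propagation with two counting passes (objective: alternative algorithm, same result).

-- ===== PORT A =====
-- helpers shared by both ports (Source B contains the same check_in_garden / get_corners code verbatim)
def pvCheckInGarden (x y : Int) (garden : List String) : Bool :=
  decide (0 ≤ x) && decide (x < PySem.List.len garden) &&
  decide (0 ≤ y) && decide (y < PySem.Str.len (garden.headD ""))
  -- 'len(garden[0])' ported as headD "": exact, since Python short-circuits — garden[0] is
  -- only read when 0 ≤ x < len(garden) (so garden ≠ []); otherwise the && is false anyway.

-- 'garden[a][b]' as an Option (none = IndexError); callers compare with '== some plant'
-- under a pvCheckInGarden guard, where it is always 'some' on Pre_-admitted inputs.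
def pvPlantAt (garden : List String) (x y : Int) : Option Char :=
  (PySem.List.pyGet? garden x).bind (fun s => PySem.Str.pyGet? s y)

def pvAdjCheck (x y : Int) (garden : List String) (plant : Char) (d : Int × Int) : Bool :=
  pvCheckInGarden (x + d.1) (y + d.2) garden && (pvPlantAt garden (x + d.1) (y + d.2) == some plant)

def pvGetCorners (x y : Int) (garden : List String) (plant : Char) : Int :=
  let dirs : List (Int × Int) := [(-1,-1),(-1,0),(-1,1),(0,-1),(0,1),(1,-1),(1,0),(1,1)]
  match dirs.map (pvAdjCheck x y garden plant) with
  | [nw, n, ne, w, e, sw, s, se] =>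
    ([ (if n && w && !nw then (1:Int) else 0),
       (if n && e && !ne then (1:Int) else 0),
       (if s && w && !sw then (1:Int) else 0),
       (if s && e && !se then (1:Int) else 0),
       (if !(n || w) then (1:Int) else 0),
       (if !(n || e) then (1:Int) else 0),
       (if !(s || w) then (1:Int) else 0),
       (if !(s || e) then (1:Int) else 0) ]).sum
  | _ => 0   -- unreachable: the mapped list has 8 elements

def pvDirs4 : List (Int × Int) := [(-1,0),(1,0),(0,-1),(0,1)]

-- the 'while queue' loop of find_region; fuel is a guard only (the loop's measure is below it)
def pvFloodLoop (garden : List String) (plant : Char) :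
    Nat → PySem.Set (Int × Int) → List (Int × Int) → PySem.Set (Int × Int)
  | 0, region, _ => region
  | fuel+1, region, queue =>
    match PySem.List.pop? queue with      -- queue.pop()
    | none => region                      -- while queue: exit
    | some (c, rest) =>
      if PySem.Set.contains region c then
        pvFloodLoop garden plant fuel region rest
      else
        let region' := PySem.Set.add region c
        let queue' := pvDirs4.foldl (fun q d =>
          if pvCheckInGarden (c.1 + d.1) (c.2 + d.2) garden
              && (pvPlantAt garden (c.1 + d.1) (c.2 + d.2) == some plant)
              && !(PySem.Set.contains region' (c.1 + d.1, c.2 + d.2))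
              && !(q.contains (c.1 + d.1, c.2 + d.2))
          then q ++ [(c.1 + d.1, c.2 + d.2)] else q) rest
        pvFloodLoop garden plant fuel region' queue'

def pvFindRegion (x y : Int) (garden : List String) : PySem.Set (Int × Int) × Int :=
  let plant := (pvPlantAt garden x y).getD default  -- garden[x][y]: 'some' on every call A makes on Pre_ inputs
  let region := pvFloodLoop garden plant
      (5 * (PySem.List.len garden).toNat * (PySem.Str.len (garden.headD "")).toNat + 2) [] [(x, y)]
  let corners := (region.map (fun c => pvGetCorners c.1 c.2 garden plant)).sum
  (region, corners * PySem.Set.len region)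

def calc_discounted_cost (garden : List String) : Int :=
  ((PySem.List.pyRange 0 (PySem.List.len garden) 1).foldl (fun st x =>
      (PySem.List.pyRange 0 (PySem.Str.len (garden.headD "")) 1).foldl (fun st y =>
        if !(PySem.Set.contains st.1 (x, y)) then
          let rc := pvFindRegion x y garden
          (PySem.Set.update st.1 rc.1, st.2 + rc.2)
        else st) st)
      (([] : PySem.Set (Int × Int)), (0 : Int))).2

-- ===== PORT B =====
-- the 'while changed' loop of Source B; each call is one full pass over the cells (fuel is a guard only)
def pvPropagate (garden : List String) (w n : Int) : Nat → List Int → List Int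
  | 0, label => label
  | fuel+1, label =>
    let st := (PySem.List.pyRange 0 n 1).foldl (fun st i =>
      let x := PySem.Int.floordiv i w
      let y := PySem.Int.mod i w
      let m := pvDirs4.foldl (fun (m : Int) d =>
        if pvCheckInGarden (x + d.1) (y + d.2) garden
            && (pvPlantAt garden (x + d.1) (y + d.2) == pvPlantAt garden x y) then
          (if PySem.List.pyGetD st.1 ((x + d.1) * w + (y + d.2)) 0 < m
           then PySem.List.pyGetD st.1 ((x + d.1) * w + (y + d.2)) 0 else m)
        else m) (PySem.List.pyGetD st.1 i 0)
      if m < PySem.List.pyGetD st.1 i 0 then (PySem.List.pySetD st.1 i m, true) else st)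
      (label, false)
    if st.2 then pvPropagate garden w n fuel st.1 else st.1

def calc_discounted_cost_alt (garden : List String) : Int :=
  if garden = [] then 0                              -- if not garden: return 0
  else
    let h := PySem.List.len garden
    let w := PySem.Str.len (garden.headD "")         -- garden[0]: garden ≠ [] here
    let n := h * w
    let label := pvPropagate garden w n (n * n + 1).toNat (PySem.List.pyRange 0 n 1)
    let area := (PySem.List.pyRange 0 n 1).foldl (fun d i =>
        PySem.Dict.modify d (PySem.List.pyGetD label i 0) 0 (fun v => v + 1)) PySem.Dict.empty
    (PySem.List.pyRange 0 n 1).foldl (fun tot i =>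
        tot + pvGetCorners (PySem.Int.floordiv i w) (PySem.Int.mod i w) garden
                ((pvPlantAt garden (PySem.Int.floordiv i w) (PySem.Int.mod i w)).getD default)
              * PySem.Dict.getD area (PySem.List.pyGetD label i 0) 0) 0
          -- label[i] / area[label[i]] in total form: i is in range and the key is always present

-- ===== PRECONDITION & SPEC =====
-- Pre_ excludes exactly the inputs on which A raises IndexError: a row shorter than row 0
-- is eventually indexed at a column ≥ its length (every column < len(garden[0]) of every
-- row is read by the scan). On all other inputs A returns normally.
def Pre_calc_discounted_cost (garden : List String) : Prop :=
  ∀ s ∈ garden, (garden.headD "").toList.length ≤ s.toList.length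
instance (garden : List String) : Decidable (Pre_calc_discounted_cost garden) := by
  unfold Pre_calc_discounted_cost; infer_instance
def pvWitness_calc_discounted_cost : List String := (["AAB", "ABB", "BBA"])

def Spec_calc_discounted_cost (garden : List String) (out : Int) : Prop := out = calc_discounted_cost_alt garden
instance (garden : List String) (out : Int) : Decidable (Spec_calc_discounted_cost garden out) := by unfold Spec_calc_discounted_cost; infer_instance

-- ===== CLAIM (what is proved, stated in full; the proofs are below) =====
def Claim_equal_calc_discounted_cost : Prop := ∀ (garden : List String), Dom_calc_discounted_cost garden → Pre_calc_discounted_cost garden → Spec_calc_discounted_cost garden (calc_discounted_cost garden)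

-- ===== LEMMAS AND PROOFS =====

-- ---------- proof-layer definitions ----------

def pvInB (garden : List String) (c : Int × Int) : Bool :=
  decide (0 ≤ c.1) && decide (c.1 < PySem.List.len garden) &&
  decide (0 ≤ c.2) && decide (c.2 < PySem.Str.len (garden.headD ""))

def pvAdjB (garden : List String) (c d : Int × Int) : Bool :=
  pvInB garden c && pvInB garden d &&
  (pvPlantAt garden c.1 c.2 == pvPlantAt garden d.1 d.2) &&
  ((c.1 - d.1).natAbs + (c.2 - d.2).natAbs == 1)

def pvReach (garden : List String) (c d : Int × Int) : Prop :=
  Relation.ReflTransGen (fun a b => pvAdjB garden a b = true) c d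

def pvCells (garden : List String) : List (Int × Int) :=
  (PySem.List.pyRange 0 (PySem.List.len garden) 1).flatMap
    (fun x => (PySem.List.pyRange 0 (PySem.Str.len (garden.headD "")) 1).map (fun y => (x, y)))

def pvExpand (garden : List String) (S : List (Int × Int)) : List (Int × Int) :=
  S ++ (pvCells garden).filter (fun d => !S.contains d && S.any (fun c => pvAdjB garden c d))

def pvSat (garden : List String) (s : Int × Int) : Nat → List (Int × Int)
  | 0 => [s]
  | k+1 => pvExpand garden (pvSat garden s k)

def pvCompList (garden : List String) (s : Int × Int) : List (Int × Int) :=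
  (pvCells garden).filter (fun d => (pvSat garden s (pvCells garden).length).contains d)

def pvCompSize (garden : List String) (s : Int × Int) : Int :=
  (pvCompList garden s).length

def pvCorners (garden : List String) (c : Int × Int) : Int :=
  pvGetCorners c.1 c.2 garden ((pvPlantAt garden c.1 c.2).getD default)

def pvSpecTotal (garden : List String) : Int :=
  ((pvCells garden).map (fun c => pvCorners garden c * pvCompSize garden c)).sum

-- ---------- basic facts ----------

theorem pv_check_eq_inB (garden : List String) (x y : Int) :
    pvCheckInGarden x y garden = pvInB garden (x, y) := rfl

theorem pv_plantAt_some (garden : List String) (hPre : Pre_calc_discounted_cost garden)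
    (c : Int × Int) (hc : pvInB garden c = true) :
    ∃ ch, pvPlantAt garden c.1 c.2 = some ch := by
  simp only [pvInB, Bool.and_eq_true, decide_eq_true_eq, PySem.List.len_eq, PySem.Str.len_eq] at hc
  obtain ⟨⟨⟨h1, h2⟩, h3⟩, h4⟩ := hc
  unfold pvPlantAt
  rw [PySem.List.pyGet?_eq_some_getElem garden h1 (by exact_mod_cast h2)]
  have hmem : garden[c.1.toNat]'(by omega) ∈ garden := List.getElem_mem _
  have hlen := hPre _ hmem
  simp only [Option.bind_some]
  unfold PySem.Str.pyGet? PySem.Chars.pyGet?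
  rw [PySem.List.pyGet?_eq_some_getElem _ h3 (by omega)]
  exact ⟨_, rfl⟩

theorem pv_adjB_symm (garden : List String) (c d : Int × Int) :
    pvAdjB garden c d = pvAdjB garden d c := by
  rw [Bool.eq_iff_iff]
  simp only [pvAdjB, Bool.and_eq_true, beq_iff_eq]
  constructor
  · rintro ⟨⟨⟨h1, h2⟩, h3⟩, h4⟩
    refine ⟨⟨⟨h2, h1⟩, h3.symm⟩, by omega⟩
  · rintro ⟨⟨⟨h1, h2⟩, h3⟩, h4⟩
    refine ⟨⟨⟨h2, h1⟩, h3.symm⟩, by omega⟩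

theorem pv_adjB_inB (garden : List String) (c d : Int × Int) (h : pvAdjB garden c d = true) :
    pvInB garden c = true ∧ pvInB garden d = true := by
  simp only [pvAdjB, Bool.and_eq_true] at h
  exact ⟨h.1.1.1, h.1.1.2⟩

theorem pv_reach_symm (garden : List String) {c d : Int × Int} (h : pvReach garden c d) :
    pvReach garden d c := by
  refine Relation.ReflTransGen.symmetric ?_ h
  intro a b hab
  rwa [pv_adjB_symm] at hab

theorem pv_reach_inB (garden : List String) {s d : Int × Int} (hs : pvInB garden s = true)
    (h : pvReach garden s d) : pvInB garden d = true := by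
  induction h with
  | refl => exact hs
  | tail _ hbc ih => exact (pv_adjB_inB garden _ _ hbc).2

theorem pv_reach_iff_of_reach (garden : List String) {c d : Int × Int}
    (h : pvReach garden c d) (e : Int × Int) : pvReach garden c e ↔ pvReach garden d e := by
  exact ⟨fun hce => Relation.ReflTransGen.trans (pv_reach_symm garden h) hce,
    fun hde => Relation.ReflTransGen.trans h hde⟩

-- the 4 directions are exactly the Adj offsets
theorem pv_adjB_of_dir (garden : List String) (c : Int × Int) (plant : Char)
    (hc : pvInB garden c = true) (hp : pvPlantAt garden c.1 c.2 = some plant)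
    (d : Int × Int) (hd : d ∈ pvDirs4)
    (hg : (pvCheckInGarden (c.1 + d.1) (c.2 + d.2) garden &&
           (pvPlantAt garden (c.1 + d.1) (c.2 + d.2) == some plant)) = true) :
    pvAdjB garden c (c.1 + d.1, c.2 + d.2) = true := by
  simp only [Bool.and_eq_true, beq_iff_eq] at hg
  rw [pv_check_eq_inB] at hg
  simp only [pvAdjB, Bool.and_eq_true, beq_iff_eq]
  refine ⟨⟨⟨hc, hg.1⟩, by rw [hp, hg.2]⟩, ?_⟩
  simp only [pvDirs4, List.mem_cons, List.not_mem_nil, or_false] at hd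
  rcases hd with h | h | h | h <;> subst h <;> simp

theorem pv_adjB_dest (garden : List String) (c e : Int × Int) (plant : Char)
    (hp : pvPlantAt garden c.1 c.2 = some plant) (h : pvAdjB garden c e = true) :
    ∃ d ∈ pvDirs4, e = (c.1 + d.1, c.2 + d.2) ∧
      (pvCheckInGarden e.1 e.2 garden && (pvPlantAt garden e.1 e.2 == some plant)) = true := by
  simp only [pvAdjB, Bool.and_eq_true, beq_iff_eq] at h
  obtain ⟨⟨⟨hc, he⟩, hpl⟩, hdist⟩ := h
  have hguard : (pvCheckInGarden e.1 e.2 garden && (pvPlantAt garden e.1 e.2 == some plant)) = true := by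
    simp only [Bool.and_eq_true, beq_iff_eq]
    rw [pv_check_eq_inB]
    exact ⟨he, by rw [← hpl, hp]⟩
  have hcases : (e.1 = c.1 - 1 ∧ e.2 = c.2) ∨ (e.1 = c.1 + 1 ∧ e.2 = c.2) ∨
      (e.1 = c.1 ∧ e.2 = c.2 - 1) ∨ (e.1 = c.1 ∧ e.2 = c.2 + 1) := by omega
  rcases hcases with ⟨h1, h2⟩ | ⟨h1, h2⟩ | ⟨h1, h2⟩ | ⟨h1, h2⟩
  · exact ⟨(-1, 0), by simp [pvDirs4], by ext <;> simp <;> omega, hguard⟩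
  · exact ⟨(1, 0), by simp [pvDirs4], by ext <;> simp <;> omega, hguard⟩
  · exact ⟨(0, -1), by simp [pvDirs4], by ext <;> simp <;> omega, hguard⟩
  · exact ⟨(0, 1), by simp [pvDirs4], by ext <;> simp <;> omega, hguard⟩

-- ---------- cells ----------

theorem pv_mem_cells (garden : List String) (c : Int × Int) :
    c ∈ pvCells garden ↔ pvInB garden c = true := by
  simp only [pvCells, List.mem_flatMap, List.mem_map, PySem.List.mem_pyRange_one,
    pvInB, Bool.and_eq_true, decide_eq_true_eq]
  constructor
  · rintro ⟨x, ⟨hx0, hx1⟩, y, ⟨hy0, hy1⟩, rfl⟩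
    exact ⟨⟨⟨hx0, hx1⟩, hy0⟩, hy1⟩
  · rintro ⟨⟨⟨hx0, hx1⟩, hy0⟩, hy1⟩
    exact ⟨c.1, ⟨hx0, hx1⟩, c.2, ⟨hy0, hy1⟩, rfl⟩

theorem pv_nodup_cells (garden : List String) : (pvCells garden).Nodup := by
  unfold pvCells
  rw [List.nodup_flatMap]
  constructor
  · intro x _
    exact (PySem.List.nodup_pyRange_one _ _).map (fun a b h => by simpa using h)
  · refine (PySem.List.pairwise_lt_pyRange_one 0 (PySem.List.len garden)).imp ?_
    intro a b hab
    intro p hp hq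
    simp only [List.mem_map] at hp hq
    obtain ⟨y1, _, rfl⟩ := hp
    obtain ⟨y2, _, h2⟩ := hq
    have : b = a := congrArg Prod.fst h2
    omega

theorem pv_length_cells (garden : List String) :
    (pvCells garden).length =
      (PySem.List.len garden).toNat * (PySem.Str.len (garden.headD "")).toNat := by
  unfold pvCells
  rw [List.length_flatMap]
  have hall : ∀ b ∈ List.map (fun a =>
        ((PySem.List.pyRange 0 (PySem.Str.len (garden.headD "")) 1).map (fun y => (a, y))).length)
        (PySem.List.pyRange 0 (PySem.List.len garden) 1),
      b = (PySem.Str.len (garden.headD "")).toNat := by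
    intro b hb
    simp only [List.mem_map] at hb
    obtain ⟨x, _, rfl⟩ := hb
    rw [List.length_map, PySem.List.length_pyRange_one]
    omega
  rw [List.sum_eq_card_nsmul _ _ hall, List.length_map, PySem.List.length_pyRange_one,
    smul_eq_mul, Int.sub_zero]


-- ---------- saturation = reachability ----------

theorem pv_sat_sound (garden : List String) (s : Int × Int) (k : Nat) :
    ∀ d ∈ pvSat garden s k, pvReach garden s d := by
  induction k with
  | zero =>
    intro d hd
    simp only [pvSat, List.mem_singleton] at hd
    subst hd
    exact Relation.ReflTransGen.refl
  | succ k ih =>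
    intro d hd
    simp only [pvSat, pvExpand, List.mem_append, List.mem_filter, Bool.and_eq_true,
      List.any_eq_true] at hd
    rcases hd with hd | ⟨_, _, c, hc, hadj⟩
    · exact ih d hd
    · exact Relation.ReflTransGen.tail (ih c hc) hadj

theorem pv_sat_mono (garden : List String) (s : Int × Int) {k m : Nat} (h : k ≤ m) :
    pvSat garden s k ⊆ pvSat garden s m := by
  induction m with
  | zero =>
    have : k = 0 := by omega
    subst this
    exact fun x hx => hx
  | succ m ih =>
    rcases Nat.lt_or_ge k (m+1) with hk | hk
    · intro x hx
      have hx' := ih (by omega) hx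
      simp only [pvSat, pvExpand, List.mem_append]
      exact Or.inl hx'
    · have : k = m + 1 := by omega
      subst this
      exact fun x hx => hx

theorem pv_sat_nodup (garden : List String) (s : Int × Int) (k : Nat) :
    (pvSat garden s k).Nodup := by
  induction k with
  | zero => simp [pvSat]
  | succ k ih =>
    simp only [pvSat, pvExpand]
    rw [List.nodup_append]
    refine ⟨ih, ((pv_nodup_cells garden).filter _), ?_⟩
    intro x hx y hy
    rw [List.mem_filter] at hy
    have h2 := hy.2
    rw [Bool.and_eq_true] at h2
    have h3 := h2.1
    rw [Bool.not_eq_true', List.contains_eq_mem, decide_eq_false_iff_not] at h3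
    intro hxy
    exact h3 (hxy ▸ hx)

theorem pv_sat_subset_cells (garden : List String) (s : Int × Int)
    (hs : pvInB garden s = true) (k : Nat) : pvSat garden s k ⊆ pvCells garden := by
  induction k with
  | zero =>
    intro x hx
    simp only [pvSat, List.mem_singleton] at hx
    subst hx
    exact (pv_mem_cells garden x).mpr hs
  | succ k ih =>
    intro x hx
    simp only [pvSat, pvExpand, List.mem_append, List.mem_filter] at hx
    rcases hx with hx | ⟨hx, _⟩
    · exact ih hx
    · exact hx

theorem pv_expand_fix_closed (garden : List String) (S : List (Int × Int))
    (hfix : pvExpand garden S = S) :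
    ∀ c ∈ S, ∀ d, pvAdjB garden c d = true → d ∈ S := by
  intro c hc d hadj
  by_contra hd
  have hdcells : d ∈ pvCells garden :=
    (pv_mem_cells garden d).mpr (pv_adjB_inB garden c d hadj).2
  have hmem : d ∈ (pvCells garden).filter
      (fun d => !S.contains d && S.any (fun c => pvAdjB garden c d)) := by
    rw [List.mem_filter]
    refine ⟨hdcells, ?_⟩
    simp only [Bool.and_eq_true, Bool.not_eq_true', List.any_eq_true]
    refine ⟨?_, c, hc, hadj⟩
    rw [List.contains_eq_mem]
    simpa using hd
  have : d ∈ pvExpand garden S := by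
    simp only [pvExpand, List.mem_append]
    exact Or.inr hmem
  rw [hfix] at this
  exact hd this

theorem pv_sat_fix (garden : List String) (s : Int × Int) (hs : pvInB garden s = true) :
    pvExpand garden (pvSat garden s (pvCells garden).length) =
      pvSat garden s (pvCells garden).length := by
  set N := (pvCells garden).length with hN
  have hlen : ∀ k, (pvSat garden s k).length ≤ N := by
    intro k
    have hnd := pv_sat_nodup garden s k
    have hsub := pv_sat_subset_cells garden s hs k
    exact (hnd.subperm hsub).length_le
  have hstep : ∀ k, (∃ j ≤ k, pvExpand garden (pvSat garden s j) = pvSat garden s j) ∨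
      k + 1 ≤ (pvSat garden s k).length := by
    intro k
    induction k with
    | zero => right; simp [pvSat]
    | succ k ih =>
      rcases ih with ⟨j, hj, hfix⟩ | hlen'
      · exact Or.inl ⟨j, by omega, hfix⟩
      · by_cases hfix : pvExpand garden (pvSat garden s k) = pvSat garden s k
        · exact Or.inl ⟨k, by omega, hfix⟩
        · right
          have hge : (pvSat garden s (k+1)).length ≥ (pvSat garden s k).length + 1 := by
            show (pvExpand garden (pvSat garden s k)).length ≥ _
            unfold pvExpand
            rw [List.length_append]
            rcases Nat.eq_zero_or_pos ((pvCells garden).filter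
                (fun d => !(pvSat garden s k).contains d &&
                  (pvSat garden s k).any (fun c => pvAdjB garden c d))).length with h0 | h0
            · exfalso
              apply hfix
              unfold pvExpand
              rw [List.length_eq_zero_iff.mp h0, List.append_nil]
            · omega
          omega
  have hfix_at : ∃ j ≤ N, pvExpand garden (pvSat garden s j) = pvSat garden s j := by
    rcases hstep N with h | h
    · exact h
    · exfalso
      have := hlen N
      omega
  obtain ⟨j, hj, hfix⟩ := hfix_at
  have hconst : ∀ m, j ≤ m → pvSat garden s m = pvSat garden s j := by
    intro m hm
    induction m with
    | zero =>
      have : j = 0 := by omega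
      rw [this]
    | succ m ih =>
      rcases Nat.lt_or_ge j (m+1) with h1 | h1
      · have hm' := ih (by omega)
        show pvExpand garden (pvSat garden s m) = _
        rw [hm', hfix]
      · have : j = m + 1 := by omega
        rw [this]
  rw [hconst N hj, hfix]

theorem pv_satMem_iff (garden : List String) (s : Int × Int) (hs : pvInB garden s = true)
    (d : Int × Int) :
    d ∈ pvSat garden s (pvCells garden).length ↔ pvReach garden s d := by
  constructor
  · exact pv_sat_sound garden s _ d
  · intro h
    induction h with
    | refl => exact pv_sat_mono garden s (Nat.zero_le _) (by simp [pvSat])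
    | tail hbc hadj ih =>
      exact pv_expand_fix_closed garden _ (pv_sat_fix garden s hs) _ ih _ hadj

-- ---------- components ----------

theorem pv_mem_compList (garden : List String) (s : Int × Int) (hs : pvInB garden s = true)
    (d : Int × Int) : d ∈ pvCompList garden s ↔ pvReach garden s d := by
  unfold pvCompList
  rw [List.mem_filter]
  constructor
  · intro ⟨_, h⟩
    rw [List.contains_eq_mem, decide_eq_true_eq] at h
    exact (pv_satMem_iff garden s hs d).mp h
  · intro h
    refine ⟨(pv_mem_cells garden d).mpr (pv_reach_inB garden hs h), ?_⟩
    rw [List.contains_eq_mem, decide_eq_true_eq]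
    exact (pv_satMem_iff garden s hs d).mpr h

theorem pv_nodup_compList (garden : List String) (s : Int × Int) :
    (pvCompList garden s).Nodup := (pv_nodup_cells garden).filter _

theorem pv_compList_congr (garden : List String) {s d : Int × Int}
    (hs : pvInB garden s = true) (h : pvReach garden s d) :
    pvCompList garden s = pvCompList garden d := by
  have hd : pvInB garden d = true := pv_reach_inB garden hs h
  unfold pvCompList
  apply List.filter_congr
  intro e he
  have hiff : (e ∈ pvSat garden s (pvCells garden).length) ↔
      (e ∈ pvSat garden d (pvCells garden).length) := by
    rw [pv_satMem_iff garden s hs e, pv_satMem_iff garden d hd e]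
    exact pv_reach_iff_of_reach garden h e
  rw [List.contains_eq_mem, List.contains_eq_mem]
  exact decide_eq_decide.mpr hiff

-- ---------- A-side: the flood-fill loop computes the component ----------

theorem pv_reach_plant (garden : List String) {s d : Int × Int} (h : pvReach garden s d) :
    pvPlantAt garden d.1 d.2 = pvPlantAt garden s.1 s.2 := by
  induction h with
  | refl => rfl
  | tail _ hadj ih =>
    simp only [pvAdjB, Bool.and_eq_true, beq_iff_eq] at hadj
    rw [← hadj.1.2, ih]

theorem pv_filter_remove_one (l : List (Int × Int)) (hl : l.Nodup) (c : Int × Int)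
    (hc : c ∈ l) (p : Int × Int → Bool) (hpc : p c = true) :
    (l.filter (fun e => p e && !(e == c))).length + 1 = (l.filter p).length := by
  have hnd : (l.filter p).Nodup := hl.filter _
  have hc' : c ∈ l.filter p := List.mem_filter.mpr ⟨hc, hpc⟩
  have hlen := List.length_erase_of_mem hc'
  rw [hnd.erase_eq_filter] at hlen
  rw [List.filter_filter] at hlen
  have hfun : List.filter (fun a => (a != c) && p a) l =
      List.filter (fun e => p e && !(e == c)) l := by
    apply List.filter_congr
    intro x _
    rw [Bool.and_comm]
    rfl
  rw [hfun] at hlen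
  have hpos : 0 < (l.filter p).length := List.length_pos_of_mem hc'
  omega

theorem pv_push_spec (garden : List String) (plant : Char) (region' : List (Int × Int))
    (c : Int × Int) (dirs : List (Int × Int)) (q0 : List (Int × Int)) :
    (∀ e ∈ dirs.foldl (fun q d =>
          if pvCheckInGarden (c.1 + d.1) (c.2 + d.2) garden
              && (pvPlantAt garden (c.1 + d.1) (c.2 + d.2) == some plant)
              && !(PySem.Set.contains region' (c.1 + d.1, c.2 + d.2))
              && !(q.contains (c.1 + d.1, c.2 + d.2))
          then q ++ [(c.1 + d.1, c.2 + d.2)] else q) q0,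
        e ∈ q0 ∨ ∃ d ∈ dirs, e = (c.1 + d.1, c.2 + d.2) ∧
          (pvCheckInGarden e.1 e.2 garden && (pvPlantAt garden e.1 e.2 == some plant)) = true ∧
          region'.contains e = false) ∧
    q0 ⊆ dirs.foldl (fun q d =>
          if pvCheckInGarden (c.1 + d.1) (c.2 + d.2) garden
              && (pvPlantAt garden (c.1 + d.1) (c.2 + d.2) == some plant)
              && !(PySem.Set.contains region' (c.1 + d.1, c.2 + d.2))
              && !(q.contains (c.1 + d.1, c.2 + d.2))
          then q ++ [(c.1 + d.1, c.2 + d.2)] else q) q0 ∧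
    (∀ d ∈ dirs, (pvCheckInGarden (c.1 + d.1) (c.2 + d.2) garden
          && (pvPlantAt garden (c.1 + d.1) (c.2 + d.2) == some plant)) = true →
        (c.1 + d.1, c.2 + d.2) ∈ region' ∨
        (c.1 + d.1, c.2 + d.2) ∈ dirs.foldl (fun q d =>
          if pvCheckInGarden (c.1 + d.1) (c.2 + d.2) garden
              && (pvPlantAt garden (c.1 + d.1) (c.2 + d.2) == some plant)
              && !(PySem.Set.contains region' (c.1 + d.1, c.2 + d.2))
              && !(q.contains (c.1 + d.1, c.2 + d.2))
          then q ++ [(c.1 + d.1, c.2 + d.2)] else q) q0) ∧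
    (dirs.foldl (fun q d =>
          if pvCheckInGarden (c.1 + d.1) (c.2 + d.2) garden
              && (pvPlantAt garden (c.1 + d.1) (c.2 + d.2) == some plant)
              && !(PySem.Set.contains region' (c.1 + d.1, c.2 + d.2))
              && !(q.contains (c.1 + d.1, c.2 + d.2))
          then q ++ [(c.1 + d.1, c.2 + d.2)] else q) q0).length ≤ q0.length + dirs.length := by
  induction dirs generalizing q0 with
  | nil =>
    refine ⟨fun e he => Or.inl he, fun e he => he, ?_, by simp⟩
    intro d hd
    exact absurd hd (by simp)
  | cons d0 rest ih =>
    rw [List.foldl_cons]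
    set n0 : Int × Int := (c.1 + d0.1, c.2 + d0.2) with hn0
    set cond : Bool := pvCheckInGarden (c.1 + d0.1) (c.2 + d0.2) garden
        && (pvPlantAt garden (c.1 + d0.1) (c.2 + d0.2) == some plant)
        && !(PySem.Set.contains region' (c.1 + d0.1, c.2 + d0.2))
        && !(q0.contains (c.1 + d0.1, c.2 + d0.2)) with hcond
    set q1 : List (Int × Int) := if cond then q0 ++ [n0] else q0 with hq1
    obtain ⟨ih1, ih2, ih3, ih4⟩ := ih q1
    have hq01 : q0 ⊆ q1 := by
      rw [hq1]
      split
      · exact fun e he => List.mem_append_left _ he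
      · exact fun e he => he
    have hq1mem : ∀ e ∈ q1, e ∈ q0 ∨ (e = n0 ∧
        (pvCheckInGarden e.1 e.2 garden && (pvPlantAt garden e.1 e.2 == some plant)) = true ∧
        region'.contains e = false) := by
      intro e he
      rw [hq1] at he
      by_cases hcv : cond = true
      · rw [if_pos hcv] at he
        rcases List.mem_append.mp he with h | h
        · exact Or.inl h
        · right
          rw [List.mem_singleton] at h
          subst h
          rw [hcond] at hcv
          simp only [Bool.and_eq_true, Bool.not_eq_true'] at hcv
          refine ⟨rfl, ?_, ?_⟩
          · simp only [Bool.and_eq_true]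
            exact ⟨hcv.1.1.1, hcv.1.1.2⟩
          · rw [PySem.Set.contains_eq_listContains] at hcv
            exact hcv.1.2
      · rw [if_neg hcv] at he
        exact Or.inl he
    refine ⟨?_, fun e he => ih2 (hq01 he), ?_, ?_⟩
    · intro e he
      rcases ih1 e he with h | ⟨d, hd, rest'⟩
      · rcases hq1mem e h with h' | ⟨rfl, hg, hreg⟩
        · exact Or.inl h'
        · exact Or.inr ⟨d0, List.mem_cons_self, rfl, hg, hreg⟩
      · exact Or.inr ⟨d, List.mem_cons_of_mem _ hd, rest'⟩
    · intro d hd hg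
      rcases List.mem_cons.mp hd with rfl | hd'
      · by_cases hcv : cond = true
        · right
          apply ih2
          rw [hq1, if_pos hcv]
          exact List.mem_append_right _ (List.mem_singleton.mpr rfl)
        · rw [hcond] at hcv
          by_cases hr : PySem.Set.contains region' (c.1 + d.1, c.2 + d.2) = true
          · left
            rw [PySem.Set.contains_eq_listContains, List.contains_eq_mem,
              decide_eq_true_eq] at hr
            exact hr
          · right
            rw [Bool.not_eq_true] at hr
            simp only [Bool.and_eq_true] at hg
            have hq0c : q0.contains (c.1 + d.1, c.2 + d.2) = true := by
              by_contra hq0c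
              rw [Bool.not_eq_true] at hq0c
              apply hcv
              simp only [Bool.and_eq_true, Bool.not_eq_true']
              exact ⟨⟨⟨hg.1, hg.2⟩, hr⟩, hq0c⟩
            rw [List.contains_eq_mem, decide_eq_true_eq] at hq0c
            exact ih2 (hq01 hq0c)
      · rcases ih3 d hd' hg with h | h
        · exact Or.inl h
        · exact Or.inr h
    · have hlq1 : q1.length ≤ q0.length + 1 := by
        rw [hq1]
        split
        · simp
        · simp
      calc _ ≤ q1.length + rest.length := ih4
        _ ≤ q0.length + (rest.length + 1) := by omega
        _ = q0.length + (d0 :: rest).length := by simp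

theorem pv_flood_spec (garden : List String) (plant : Char) (s : Int × Int)
    (_hs : pvInB garden s = true) (_hps : pvPlantAt garden s.1 s.2 = some plant) :
    ∀ (fuel : Nat) (region queue : List (Int × Int)),
    region.Nodup →
    (∀ e, e ∈ region ∨ e ∈ queue →
      pvInB garden e = true ∧ pvPlantAt garden e.1 e.2 = some plant ∧ pvReach garden s e) →
    (∀ c ∈ region, ∀ d, pvAdjB garden c d = true → d ∈ region ∨ d ∈ queue) →
    (s ∈ region ∨ s ∈ queue) →
    5 * ((pvCells garden).filter (fun e => !region.contains e)).length + queue.length < fuel →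
    (pvFloodLoop garden plant fuel region queue).Nodup ∧
    (∀ d, d ∈ pvFloodLoop garden plant fuel region queue ↔ pvReach garden s d) := by
  intro fuel
  induction fuel with
  | zero =>
    intro region queue _ _ _ _ hμ
    omega
  | succ fuel ih =>
    intro region queue hnd helem hclosed hstart hμ
    rcases List.eq_nil_or_concat queue with rfl | ⟨q', c, rfl⟩
    · have hres : pvFloodLoop garden plant (fuel+1) region [] = region := rfl
      rw [hres]
      refine ⟨hnd, fun d => ⟨fun hd => (helem d (Or.inl hd)).2.2, fun hr => ?_⟩⟩
      have hclosed' : ∀ c ∈ region, ∀ d, pvAdjB garden c d = true → d ∈ region := by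
        intro c hc d hadj
        rcases hclosed c hc d hadj with h | h
        · exact h
        · exact absurd h (by simp)
      have hsr : s ∈ region := by
        rcases hstart with h | h
        · exact h
        · exact absurd h (by simp)
      induction hr with
      | refl => exact hsr
      | tail hsb hadj ihp => exact hclosed' _ ihp _ hadj
    · simp only [List.concat_eq_append] at helem hclosed hstart hμ ⊢
      have hpop : PySem.List.pop? (q' ++ [c]) = some (c, q') := PySem.List.pop?_last q' c
      by_cases hc : PySem.Set.contains region c = true
      · have hres : pvFloodLoop garden plant (fuel+1) region (q' ++ [c]) =
            pvFloodLoop garden plant fuel region q' := by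
          simp only [pvFloodLoop, hpop, hc, if_true]
        rw [hres]
        have hcmem : c ∈ region := by
          rw [PySem.Set.contains_eq_listContains, List.contains_eq_mem, decide_eq_true_eq] at hc
          exact hc
        apply ih region q' hnd
        · intro e he
          rcases he with h | h
          · exact helem e (Or.inl h)
          · exact helem e (Or.inr (List.mem_append_left _ h))
        · intro c0 hc0 d hadj
          rcases hclosed c0 hc0 d hadj with h | h
          · exact Or.inl h
          · rcases List.mem_append.mp h with h' | h'
            · exact Or.inr h'
            · rw [List.mem_singleton] at h'
              subst h'
              exact Or.inl hcmem
        · rcases hstart with h | h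
          · exact Or.inl h
          · rcases List.mem_append.mp h with h' | h'
            · exact Or.inr h'
            · rw [List.mem_singleton] at h'
              subst h'
              exact Or.inl hcmem
        · rw [List.length_append, List.length_singleton] at hμ
          omega
      · have hcmem : c ∉ region := by
          rw [PySem.Set.contains_eq_listContains, List.contains_eq_mem] at hc
          simpa using hc
        have hadd : PySem.Set.add region c = region ++ [c] := PySem.Set.add_of_not_mem hcmem
        have hres : pvFloodLoop garden plant (fuel+1) region (q' ++ [c]) =
            pvFloodLoop garden plant fuel (region ++ [c])
              (pvDirs4.foldl (fun q d =>
                if pvCheckInGarden (c.1 + d.1) (c.2 + d.2) garden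
                    && (pvPlantAt garden (c.1 + d.1) (c.2 + d.2) == some plant)
                    && !(PySem.Set.contains (region ++ [c]) (c.1 + d.1, c.2 + d.2))
                    && !(q.contains (c.1 + d.1, c.2 + d.2))
                then q ++ [(c.1 + d.1, c.2 + d.2)] else q) q') := by
          have hcf : PySem.Set.contains region c = false := by
            rw [Bool.not_eq_true] at hc
            exact hc
          simp only [pvFloodLoop, hpop, hcf, hadd]
          rw [if_neg (by simp)]
        rw [hres]
        obtain ⟨p1, p2, p3, p4⟩ := pv_push_spec garden plant (region ++ [c]) c pvDirs4 q'
        have hcq : c ∈ q' ++ [c] := List.mem_append_right _ (by simp)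
        obtain ⟨hcInB, hcplant, hcreach⟩ := helem c (Or.inr hcq)
        have hnd' : (region ++ [c]).Nodup := by
          rw [List.nodup_append]
          refine ⟨hnd, by simp, ?_⟩
          intro a ha b hb
          rw [List.mem_singleton] at hb
          subst hb
          intro hab
          exact hcmem (hab ▸ ha)
        apply ih (region ++ [c]) _ hnd'
        · intro e he
          rcases he with h | h
          · rcases List.mem_append.mp h with h' | h'
            · exact helem e (Or.inl h')
            · rw [List.mem_singleton] at h'
              subst h'
              exact ⟨hcInB, hcplant, hcreach⟩
          · rcases p1 e h with h' | ⟨d, hd, heq, hg, _⟩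
            · exact helem e (Or.inr (List.mem_append_left _ h'))
            · subst heq
              simp only [Bool.and_eq_true] at hg
              have hInB : pvInB garden (c.1 + d.1, c.2 + d.2) = true := by
                rw [← pv_check_eq_inB]
                exact hg.1
              have hpl : pvPlantAt garden (c.1 + d.1) (c.2 + d.2) = some plant := by
                have := hg.2
                rwa [beq_iff_eq] at this
              refine ⟨hInB, hpl, Relation.ReflTransGen.tail hcreach ?_⟩
              exact pv_adjB_of_dir garden c plant hcInB hcplant d hd
                (by simp only [Bool.and_eq_true]; exact hg)
        · intro c0 hc0 d hadj
          rcases List.mem_append.mp hc0 with h | h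
          · rcases hclosed c0 h d hadj with h' | h'
            · exact Or.inl (List.mem_append_left _ h')
            · rcases List.mem_append.mp h' with h'' | h''
              · exact Or.inr (p2 h'')
              · exact Or.inl (List.mem_append_right _ h'')
          · rw [List.mem_singleton] at h
            subst h
            obtain ⟨dir, hdir, heq, hguard⟩ := pv_adjB_dest garden c0 d plant hcplant hadj
            subst heq
            rcases p3 dir hdir hguard with h' | h'
            · exact Or.inl h'
            · exact Or.inr h'
        · rcases hstart with h | h
          · exact Or.inl (List.mem_append_left _ h)
          · rcases List.mem_append.mp h with h' | h'
            · exact Or.inr (p2 h')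
            · exact Or.inl (List.mem_append_right _ h')
        · have hpred : ∀ e, (!(region ++ [c]).contains e) =
              ((!region.contains e) && !(e == c)) := by
            intro e
            by_cases h1 : e ∈ region <;> by_cases h2 : e = c <;>
              simp [List.contains_eq_mem, h1, h2]
          have hfeq : (pvCells garden).filter (fun e => !(region ++ [c]).contains e) =
              (pvCells garden).filter (fun e => (!region.contains e) && !(e == c)) := by
            apply List.filter_congr
            intro e _
            exact hpred e
          rw [hfeq]
          have hrm := pv_filter_remove_one (pvCells garden) (pv_nodup_cells garden) c
            ((pv_mem_cells garden c).mpr hcInB) (fun e => !region.contains e)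
            (by rw [Bool.not_eq_true', List.contains_eq_mem]; simpa using hcmem)
          have hlen4 : pvDirs4.length = 4 := rfl
          rw [List.length_append, List.length_singleton] at hμ
          beta_reduce at hrm
          omega

theorem pv_findRegion_spec (garden : List String)
    (hPre : Pre_calc_discounted_cost garden) (s : Int × Int) (hs : pvInB garden s = true) :
    (pvFindRegion s.1 s.2 garden).2 =
      ((pvCompList garden s).map (fun d => pvCorners garden d * pvCompSize garden d)).sum ∧
    (pvFindRegion s.1 s.2 garden).1.Nodup ∧
    (∀ d, d ∈ (pvFindRegion s.1 s.2 garden).1 ↔ pvReach garden s d) := by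
  obtain ⟨ch, hch⟩ := pv_plantAt_some garden hPre s hs
  obtain ⟨hnd, hmem⟩ := pv_flood_spec garden ch s hs hch
      (5 * (PySem.List.len garden).toNat * (PySem.Str.len (garden.headD "")).toNat + 2) [] [s]
      (by simp)
      (by
        intro e he
        rcases he with h | h
        · simp at h
        · rw [List.mem_singleton] at h
          subst h
          exact ⟨hs, hch, Relation.ReflTransGen.refl⟩)
      (by intro c hc; simp at hc)
      (Or.inr (by simp))
      (by
        have hfil : (pvCells garden).filter (fun e => !(([] : List (Int × Int)).contains e)) =
            pvCells garden := by
          apply List.filter_eq_self.mpr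
          intro a _
          rfl
        rw [hfil, pv_length_cells, List.length_singleton]
        have h5 : 5 * ((PySem.List.len garden).toNat * (PySem.Str.len (garden.headD "")).toNat) =
            5 * (PySem.List.len garden).toNat * (PySem.Str.len (garden.headD "")).toNat := by ring
        omega)
  have hfr : pvFindRegion s.1 s.2 garden =
      (pvFloodLoop garden ch
        (5 * (PySem.List.len garden).toNat * (PySem.Str.len (garden.headD "")).toNat + 2) [] [s],
       ((pvFloodLoop garden ch
        (5 * (PySem.List.len garden).toNat * (PySem.Str.len (garden.headD "")).toNat + 2) [] [s]).map
          (fun c => pvGetCorners c.1 c.2 garden ch)).sum *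
        PySem.Set.len (pvFloodLoop garden ch
        (5 * (PySem.List.len garden).toNat * (PySem.Str.len (garden.headD "")).toNat + 2) [] [s])) := by
    simp only [pvFindRegion, hch, Option.getD_some, Prod.mk.eta]
  rw [hfr]
  set R := pvFloodLoop garden ch
      (5 * (PySem.List.len garden).toNat * (PySem.Str.len (garden.headD "")).toNat + 2) [] [s] with hR
  have hperm : R.Perm (pvCompList garden s) :=
    (List.perm_ext_iff_of_nodup hnd (pv_nodup_compList garden s)).mpr
      (fun a => by rw [hmem a, pv_mem_compList garden s hs a])
  refine ⟨?_, hnd, hmem⟩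
  have hmapc : (pvCompList garden s).map (fun c => pvGetCorners c.1 c.2 garden ch) =
      (pvCompList garden s).map (fun d => pvCorners garden d) := by
    apply List.map_congr_left
    intro d hd
    have hreach := (pv_mem_compList garden s hs d).mp hd
    have hpl : pvPlantAt garden d.1 d.2 = some ch := by
      rw [pv_reach_plant garden hreach, hch]
    simp [pvCorners, hpl]
  have hsum : (R.map (fun c => pvGetCorners c.1 c.2 garden ch)).sum =
      ((pvCompList garden s).map (fun d => pvCorners garden d)).sum := by
    rw [← hmapc]
    exact (hperm.map _).sum_eq
  rw [hsum]
  have hlenR : PySem.Set.len R = pvCompSize garden s := by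
    show (R.length : Int) = _
    rw [hperm.length_eq]
    rfl
  rw [hlenR, ← List.sum_map_mul_right]
  refine congrArg List.sum ?_
  apply List.map_congr_left
  intro d hd
  have hreach := (pv_mem_compList garden s hs d).mp hd
  show pvCorners garden d * pvCompSize garden s = pvCorners garden d * pvCompSize garden d
  unfold pvCompSize
  rw [pv_compList_congr garden hs hreach]

theorem pv_sum_filter_or (l : List (Int × Int)) (p q : Int × Int → Bool)
    (f : Int × Int → Int) (hdisj : ∀ d ∈ l, ¬(p d = true ∧ q d = true)) :
    ((l.filter (fun d => p d || q d)).map f).sum =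
      ((l.filter p).map f).sum + ((l.filter q).map f).sum := by
  induction l with
  | nil => simp
  | cons x t ih =>
    have hx := hdisj x List.mem_cons_self
    have iht := ih (fun d hd => hdisj d (List.mem_cons_of_mem _ hd))
    by_cases hp : p x = true
    · have hq : q x = false := by
        cases hqv : q x
        · rfl
        · exact absurd ⟨hp, hqv⟩ hx
      simp only [List.filter_cons, hp, hq, Bool.true_or, if_true, Bool.false_eq_true,
        if_false, List.map_cons, List.sum_cons, iht]
      ring
    · have hp' : p x = false := by
        cases hpv : p x
        · rfl
        · exact absurd hpv hp
      by_cases hq : q x = true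
      · simp only [List.filter_cons, hp', hq, Bool.false_or, if_true, Bool.false_eq_true,
          if_false, List.map_cons, List.sum_cons, iht]
        ring
      · have hq' : q x = false := by
          cases hqv : q x
          · rfl
          · exact absurd hqv hq
        simp only [List.filter_cons, hp', hq', Bool.false_or, Bool.false_eq_true, if_false, iht]

theorem pv_nested_fold {β : Type} (garden : List String) (g : β → Int × Int → β) (init : β) :
    (PySem.List.pyRange 0 (PySem.List.len garden) 1).foldl (fun st x =>
      (PySem.List.pyRange 0 (PySem.Str.len (garden.headD "")) 1).foldl
        (fun st y => g st (x, y)) st) init =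
    (pvCells garden).foldl g init := by
  unfold pvCells
  generalize PySem.List.pyRange 0 (PySem.List.len garden) 1 = l1
  induction l1 generalizing init with
  | nil => rfl
  | cons x t ih =>
    rw [List.foldl_cons, List.flatMap_cons, List.foldl_append, ih]
    congr 1
    rw [← List.foldl_map]

theorem pv_outer_inv (garden : List String) (hPre : Pre_calc_discounted_cost garden) :
    ∀ (suffix P V : List (Int × Int)) (total : Int),
    pvCells garden = P ++ suffix →
    V.Nodup →
    (∀ d, d ∈ V ↔ ∃ c ∈ P, pvReach garden c d) →
    total = (((pvCells garden).filter (fun d => V.contains d)).map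
              (fun d => pvCorners garden d * pvCompSize garden d)).sum →
    (suffix.foldl (fun st c =>
        if !(PySem.Set.contains st.1 c) then
          (PySem.Set.update st.1 (pvFindRegion c.1 c.2 garden).1,
            st.2 + (pvFindRegion c.1 c.2 garden).2)
        else st) (V, total)).2 = pvSpecTotal garden := by
  intro suffix
  induction suffix with
  | nil =>
    intro P V total hcells hnd hmemV htotal
    rw [List.append_nil] at hcells
    subst hcells
    rw [List.foldl_nil]
    have hfil : (pvCells garden).filter (fun d => V.contains d) = pvCells garden := by
      apply List.filter_eq_self.mpr
      intro a ha
      rw [List.contains_eq_mem, decide_eq_true_eq]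
      exact (hmemV a).mpr ⟨a, ha, Relation.ReflTransGen.refl⟩
    rw [htotal, hfil]
    rfl
  | cons c rest ih =>
    intro P V total hcells hnd hmemV htotal
    rw [List.foldl_cons]
    have hcmemcells : c ∈ pvCells garden := by
      rw [hcells]
      exact List.mem_append_right _ List.mem_cons_self
    have hcInB : pvInB garden c = true := (pv_mem_cells garden c).mp hcmemcells
    by_cases hcv : PySem.Set.contains V c = true
    · have hcV : c ∈ V := by
        rw [PySem.Set.contains_eq_listContains, List.contains_eq_mem, decide_eq_true_eq] at hcv
        exact hcv
      rw [hcv]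
      simp only [Bool.not_true, Bool.false_eq_true, if_false]
      apply ih (P ++ [c]) V total
      · rw [hcells, List.append_assoc]
        rfl
      · exact hnd
      · intro d
        rw [hmemV d]
        constructor
        · rintro ⟨c', hc', hr⟩
          exact ⟨c', List.mem_append_left _ hc', hr⟩
        · rintro ⟨c', hc', hr⟩
          rcases List.mem_append.mp hc' with h | h
          · exact ⟨c', h, hr⟩
          · rw [List.mem_singleton] at h
            subst h
            obtain ⟨c'', hc'', hr''⟩ := (hmemV c').mp hcV
            exact ⟨c'', hc'', Relation.ReflTransGen.trans hr'' hr⟩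
      · exact htotal
    · have hcV : c ∉ V := by
        rw [PySem.Set.contains_eq_listContains, List.contains_eq_mem] at hcv
        simpa using hcv
      rw [Bool.not_eq_true] at hcv
      rw [hcv]
      simp only [Bool.not_false, if_true]
      obtain ⟨hcost, hndR, hmemR⟩ := pv_findRegion_spec garden hPre c hcInB
      apply ih (P ++ [c]) _ _
      · rw [hcells, List.append_assoc]
        rfl
      · exact PySem.Set.nodup_update V _ hnd
      · intro d
        rw [PySem.Set.mem_update]
        constructor
        · rintro (h | h)
          · obtain ⟨c', hc', hr⟩ := (hmemV d).mp h
            exact ⟨c', List.mem_append_left _ hc', hr⟩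
          · exact ⟨c, List.mem_append_right _ List.mem_cons_self, (hmemR d).mp h⟩
        · rintro ⟨c', hc', hr⟩
          rcases List.mem_append.mp hc' with h | h
          · exact Or.inl ((hmemV d).mpr ⟨c', h, hr⟩)
          · rw [List.mem_singleton] at h
            subst h
            exact Or.inr ((hmemR d).mpr hr)
      · -- new total
        have hcontains : ∀ d : Int × Int,
            (List.contains (PySem.Set.update V (pvFindRegion c.1 c.2 garden).1) d) =
            (V.contains d || (pvFindRegion c.1 c.2 garden).1.contains d) := by
          intro d
          rw [Bool.eq_iff_iff, Bool.or_eq_true]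
          simp only [PySem.Set.contains_eq_listContains, List.contains_eq_mem,
            decide_eq_true_eq]
          exact PySem.Set.mem_update V _ d
        have hfeq : (pvCells garden).filter
              (fun d => List.contains (PySem.Set.update V (pvFindRegion c.1 c.2 garden).1) d) =
            (pvCells garden).filter
              (fun d => V.contains d || (pvFindRegion c.1 c.2 garden).1.contains d) := by
          apply List.filter_congr
          intro e _
          exact hcontains e
        rw [hfeq]
        rw [pv_sum_filter_or _ _ _ _ ?hdisj]
        case hdisj =>
          intro d _
          rintro ⟨h1, h2⟩
          rw [List.contains_eq_mem, decide_eq_true_eq] at h1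
          rw [PySem.Set.contains_eq_listContains, List.contains_eq_mem,
            decide_eq_true_eq] at h2
          have hrd : pvReach garden c d := (hmemR d).mp h2
          obtain ⟨c', hc', hr'⟩ := (hmemV d).mp h1
          have : c ∈ V := (hmemV c).mpr
            ⟨c', hc', Relation.ReflTransGen.trans hr' (pv_reach_symm garden hrd)⟩
          exact hcV this
        rw [htotal, hcost]
        have hfilR : (pvCells garden).filter
              (fun d => (pvFindRegion c.1 c.2 garden).1.contains d) = pvCompList garden c := by
          unfold pvCompList
          apply List.filter_congr
          intro e _
          rw [PySem.Set.contains_eq_listContains, List.contains_eq_mem, List.contains_eq_mem]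
          apply decide_eq_decide.mpr
          rw [hmemR e, pv_satMem_iff garden c hcInB e]
        rw [hfilR]

theorem pv_A_eq_spec (garden : List String) (hPre : Pre_calc_discounted_cost garden) :
    calc_discounted_cost garden = pvSpecTotal garden := by
  unfold calc_discounted_cost
  have hnest := pv_nested_fold garden (fun st (c : Int × Int) =>
      if !(PySem.Set.contains st.1 c) then
        (PySem.Set.update st.1 (pvFindRegion c.1 c.2 garden).1,
          st.2 + (pvFindRegion c.1 c.2 garden).2)
      else st) (([] : PySem.Set (Int × Int)), (0 : Int))
  rw [show ((PySem.List.pyRange 0 (PySem.List.len garden) 1).foldl (fun st x =>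
      (PySem.List.pyRange 0 (PySem.Str.len (garden.headD "")) 1).foldl
        (fun st y =>
          if !(PySem.Set.contains st.1 (x, y)) then
            (PySem.Set.update st.1 (pvFindRegion x y garden).1,
              st.2 + (pvFindRegion x y garden).2)
          else st) st)
      (([] : PySem.Set (Int × Int)), (0 : Int))) =
    ((pvCells garden).foldl (fun st (c : Int × Int) =>
      if !(PySem.Set.contains st.1 c) then
        (PySem.Set.update st.1 (pvFindRegion c.1 c.2 garden).1,
          st.2 + (pvFindRegion c.1 c.2 garden).2)
      else st) (([] : PySem.Set (Int × Int)), (0 : Int))) from hnest]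
  exact pv_outer_inv garden hPre (pvCells garden) [] [] 0 rfl (by simp)
    (by intro d; simp) (by simp)

-- ---------- B-side: min-label propagation labels the components ----------

def pvWl (garden : List String) : Int := PySem.Str.len (garden.headD "")
def pvN (garden : List String) : Int := PySem.List.len garden * pvWl garden
def pvIdx (garden : List String) (c : Int × Int) : Int := c.1 * pvWl garden + c.2
def pvCellOf (garden : List String) (i : Int) : Int × Int :=
  (PySem.Int.floordiv i (pvWl garden), PySem.Int.mod i (pvWl garden))

-- exactly the round fold of pvPropagate (written with the lets expanded)
def pvRound (garden : List String) (w n : Int) (label : List Int) : List Int × Bool :=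
  (PySem.List.pyRange 0 n 1).foldl (fun st i =>
      if (pvDirs4.foldl (fun (m : Int) d =>
        if pvCheckInGarden (PySem.Int.floordiv i (w) + d.1)
              (PySem.Int.mod i (w) + d.2) garden
            && (pvPlantAt garden (PySem.Int.floordiv i (w) + d.1)
                  (PySem.Int.mod i (w) + d.2)
                == pvPlantAt garden (PySem.Int.floordiv i (w))
                    (PySem.Int.mod i (w))) then
          (if PySem.List.pyGetD st.1 ((PySem.Int.floordiv i (w) + d.1) * w
                + (PySem.Int.mod i (w) + d.2)) 0 < m
           then PySem.List.pyGetD st.1 ((PySem.Int.floordiv i (w) + d.1) * w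
                + (PySem.Int.mod i (w) + d.2)) 0 else m)
        else m) (PySem.List.pyGetD st.1 i 0)) < PySem.List.pyGetD st.1 i 0
      then (PySem.List.pySetD st.1 i (pvDirs4.foldl (fun (m : Int) d =>
        if pvCheckInGarden (PySem.Int.floordiv i (w) + d.1)
              (PySem.Int.mod i (w) + d.2) garden
            && (pvPlantAt garden (PySem.Int.floordiv i (w) + d.1)
                  (PySem.Int.mod i (w) + d.2)
                == pvPlantAt garden (PySem.Int.floordiv i (w))
                    (PySem.Int.mod i (w))) then
          (if PySem.List.pyGetD st.1 ((PySem.Int.floordiv i (w) + d.1) * w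
                + (PySem.Int.mod i (w) + d.2)) 0 < m
           then PySem.List.pyGetD st.1 ((PySem.Int.floordiv i (w) + d.1) * w
                + (PySem.Int.mod i (w) + d.2)) 0 else m)
        else m) (PySem.List.pyGetD st.1 i 0)), true)
      else st)
    (label, false)

theorem pv_propagate_round (garden : List String) (w n : Int) (fuel : Nat) (label : List Int) :
    pvPropagate garden w n (fuel + 1) label =
      if (pvRound garden w n label).2 then
        pvPropagate garden w n fuel (pvRound garden w n label).1
      else (pvRound garden w n label).1 := rfl

def pvValid (garden : List String) (label : List Int) : Prop :=
  label.length = (pvN garden).toNat ∧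
  ∀ c, pvInB garden c = true → ∃ e, pvInB garden e = true ∧ pvReach garden c e ∧
    PySem.List.pyGetD label (pvIdx garden c) 0 = pvIdx garden e

def pvLocalFix (garden : List String) (label : List Int) : Prop :=
  ∀ c d, pvAdjB garden c d = true →
    PySem.List.pyGetD label (pvIdx garden c) 0 ≤ PySem.List.pyGetD label (pvIdx garden d) 0

theorem pv_idx_bounds (garden : List String) (c : Int × Int) (hc : pvInB garden c = true) :
    0 ≤ pvIdx garden c ∧ pvIdx garden c < pvN garden ∧ pvCellOf garden (pvIdx garden c) = c := by
  simp only [pvInB, Bool.and_eq_true, decide_eq_true_eq] at hc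
  obtain ⟨⟨⟨h1, h2⟩, h3⟩, h4⟩ := hc
  have h4' : c.2 < pvWl garden := h4
  have h2' : c.1 < PySem.List.len garden := h2
  have hw : 0 < pvWl garden := by
    have := h3
    omega
  have hfd : PySem.Int.floordiv (pvIdx garden c) (pvWl garden) = c.1 := by
    rw [PySem.Int.floordiv_eq_iff_of_pos hw]
    unfold pvIdx
    have hexp : (c.1 + 1) * pvWl garden = c.1 * pvWl garden + pvWl garden := by ring
    omega
  have hmd : PySem.Int.mod (pvIdx garden c) (pvWl garden) = c.2 := by
    have hdm := PySem.Int.floordiv_mul_add_mod (pvIdx garden c) (pvWl garden)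
    rw [hfd] at hdm
    unfold pvIdx at hdm
    unfold pvIdx
    omega
  refine ⟨?_, ?_, ?_⟩
  · unfold pvIdx
    have : 0 ≤ c.1 * pvWl garden := mul_nonneg h1 (le_of_lt hw)
    omega
  · unfold pvIdx pvN
    have hle : (c.1 + 1) * pvWl garden ≤ PySem.List.len garden * pvWl garden :=
      mul_le_mul_of_nonneg_right (by omega) (le_of_lt hw)
    have hexp : (c.1 + 1) * pvWl garden = c.1 * pvWl garden + pvWl garden := by ring
    omega
  · unfold pvCellOf
    rw [hfd, hmd]

theorem pv_cellOf_spec (garden : List String) (i : Int) (h0 : 0 ≤ i) (h1 : i < pvN garden) :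
    pvInB garden (pvCellOf garden i) = true ∧ pvIdx garden (pvCellOf garden i) = i := by
  have hw0 : 0 ≤ pvWl garden := by
    unfold pvWl
    rw [PySem.Str.len_eq]
    omega
  have hw : 0 < pvWl garden := by
    rcases lt_or_eq_of_le hw0 with h | h
    · exact h
    · exfalso
      unfold pvN at h1
      rw [← h, mul_zero] at h1
      omega
  have hxh : PySem.Int.floordiv i (pvWl garden) < PySem.List.len garden := by
    rw [PySem.Int.floordiv_lt_iff_lt_mul hw]
    unfold pvN at h1
    exact h1
  have hx0 : 0 ≤ PySem.Int.floordiv i (pvWl garden) := by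
    rw [PySem.Int.le_floordiv_iff_mul_le hw]
    omega
  have hy0 : 0 ≤ PySem.Int.mod i (pvWl garden) := PySem.Int.mod_nonneg i hw
  have hyw : PySem.Int.mod i (pvWl garden) < pvWl garden := PySem.Int.mod_lt i hw
  constructor
  · simp only [pvInB, pvCellOf, Bool.and_eq_true, decide_eq_true_eq]
    exact ⟨⟨⟨hx0, hxh⟩, hy0⟩, hyw⟩
  · unfold pvIdx pvCellOf
    have hdm := PySem.Int.floordiv_mul_add_mod i (pvWl garden)
    omega

theorem pv_idx_inj (garden : List String) {c d : Int × Int} (hc : pvInB garden c = true)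
    (hd : pvInB garden d = true) (h : pvIdx garden c = pvIdx garden d) : c = d := by
  have h1 := (pv_idx_bounds garden c hc).2.2
  have h2 := (pv_idx_bounds garden d hd).2.2
  rw [← h1, ← h2, h]

theorem pv_grid_map (w : Int) (h : Nat) :
    (PySem.List.pyRange 0 ((h : Int) * w) 1).map
      (fun i => (PySem.Int.floordiv i w, PySem.Int.mod i w)) =
    (PySem.List.pyRange 0 (h : Int) 1).flatMap
      (fun x => (PySem.List.pyRange 0 w 1).map (fun y => (x, y))) := by
  induction h with
  | zero =>
    have h1 : ((0 : Nat) : Int) * w = 0 := by simp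
    have h2 : ((0 : Nat) : Int) = 0 := by simp
    rw [h1, h2, PySem.List.pyRange_one_eq_nil (le_refl 0)]
    rfl
  | succ h ih =>
    have hcast : ((h + 1 : Nat) : Int) = (h : Int) + 1 := by push_cast; ring
    by_cases hw : w ≤ 0
    · have hr0 : PySem.List.pyRange 0 w 1 = [] := PySem.List.pyRange_one_eq_nil hw
      have hl0 : ((h + 1 : Nat) : Int) * w ≤ 0 :=
        mul_nonpos_of_nonneg_of_nonpos (by omega) hw
      rw [PySem.List.pyRange_one_eq_nil hl0]
      simp [hr0]
    · have hw : 0 < w := by omega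
      have hsplit : PySem.List.pyRange 0 ((h + 1 : Nat) * w) 1 =
          PySem.List.pyRange 0 ((h : Nat) * w) 1 ++
          PySem.List.pyRange ((h : Int) * w) (((h : Int) + 1) * w) 1 := by
        have heq : ((h + 1 : Nat) : Int) * w = ((h : Int) + 1) * w := by rw [hcast]
        rw [heq]
        exact PySem.List.pyRange_one_append 0 ((h : Int) * w) (((h : Int) + 1) * w)
          (mul_nonneg (by omega) (by omega))
          (mul_le_mul_of_nonneg_right (by omega) (by omega))
      have hsucc : PySem.List.pyRange 0 ((h : Int) + 1) 1 =
          PySem.List.pyRange 0 (h : Int) 1 ++ [(h : Int)] :=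
        PySem.List.pyRange_one_succ_right (by omega)
      rw [hsplit, List.map_append, ih, hcast, hsucc, List.flatMap_append]
      congr 1
      rw [List.flatMap_singleton]
      have harg : (((h : Int) + 1) * w - (h : Int) * w) = w := by ring
      rw [PySem.List.pyRange_one ((h : Int) * w) (((h : Int) + 1) * w), harg,
        PySem.List.pyRange_one 0 w, Int.sub_zero, List.map_map, List.map_map]
      apply List.map_congr_left
      intro k hk
      rw [List.mem_range] at hk
      have hkw : ((k : Nat) : Int) < w := by omega
      simp only [Function.comp_apply]
      have hfd : PySem.Int.floordiv ((h : Int) * w + (k : Int)) w = (h : Int) := by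
        rw [PySem.Int.floordiv_eq_iff_of_pos hw]
        have hexp : ((h : Int) + 1) * w = (h : Int) * w + w := by ring
        omega
      have hmd : PySem.Int.mod ((h : Int) * w + (k : Int)) w = (k : Int) := by
        have hdm := PySem.Int.floordiv_mul_add_mod ((h : Int) * w + (k : Int)) w
        rw [hfd] at hdm
        omega
      rw [hfd, hmd]
      ext <;> simp

theorem pv_cells_eq_map (garden : List String) :
    (PySem.List.pyRange 0 (pvN garden) 1).map (pvCellOf garden) = pvCells garden := by
  unfold pvCells pvCellOf pvN pvWl
  have hlen : PySem.List.len garden = ((garden.length : Nat) : Int) := by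
    rw [PySem.List.len_eq]
  rw [hlen]
  exact pv_grid_map (PySem.Str.len (garden.headD "")) garden.length

theorem pv_adjB_of_dir' (garden : List String) (c : Int × Int) (hc : pvInB garden c = true)
    (d : Int × Int) (hd : d ∈ pvDirs4)
    (hg : (pvCheckInGarden (c.1 + d.1) (c.2 + d.2) garden &&
           (pvPlantAt garden (c.1 + d.1) (c.2 + d.2) == pvPlantAt garden c.1 c.2)) = true) :
    pvAdjB garden c (c.1 + d.1, c.2 + d.2) = true := by
  simp only [Bool.and_eq_true, beq_iff_eq] at hg
  rw [pv_check_eq_inB] at hg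
  simp only [pvAdjB, Bool.and_eq_true, beq_iff_eq]
  refine ⟨⟨⟨hc, hg.1⟩, hg.2.symm⟩, ?_⟩
  simp only [pvDirs4, List.mem_cons, List.not_mem_nil, or_false] at hd
  rcases hd with h | h | h | h <;> subst h <;> simp

theorem pv_adjB_dest' (garden : List String) (c e : Int × Int) (h : pvAdjB garden c e = true) :
    ∃ d ∈ pvDirs4, e = (c.1 + d.1, c.2 + d.2) ∧
      (pvCheckInGarden e.1 e.2 garden &&
        (pvPlantAt garden e.1 e.2 == pvPlantAt garden c.1 c.2)) = true := by
  simp only [pvAdjB, Bool.and_eq_true, beq_iff_eq] at h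
  obtain ⟨⟨⟨hc, he⟩, hpl⟩, hdist⟩ := h
  have hguard : (pvCheckInGarden e.1 e.2 garden &&
      (pvPlantAt garden e.1 e.2 == pvPlantAt garden c.1 c.2)) = true := by
    simp only [Bool.and_eq_true, beq_iff_eq]
    rw [pv_check_eq_inB]
    exact ⟨he, hpl.symm⟩
  have hcases : (e.1 = c.1 - 1 ∧ e.2 = c.2) ∨ (e.1 = c.1 + 1 ∧ e.2 = c.2) ∨
      (e.1 = c.1 ∧ e.2 = c.2 - 1) ∨ (e.1 = c.1 ∧ e.2 = c.2 + 1) := by omega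
  rcases hcases with ⟨h1, h2⟩ | ⟨h1, h2⟩ | ⟨h1, h2⟩ | ⟨h1, h2⟩
  · exact ⟨(-1, 0), by simp [pvDirs4], by ext <;> simp <;> omega, hguard⟩
  · exact ⟨(1, 0), by simp [pvDirs4], by ext <;> simp <;> omega, hguard⟩
  · exact ⟨(0, -1), by simp [pvDirs4], by ext <;> simp <;> omega, hguard⟩
  · exact ⟨(0, 1), by simp [pvDirs4], by ext <;> simp <;> omega, hguard⟩

theorem pv_minfold_spec (dirs : List (Int × Int)) (cond : Int × Int → Bool)
    (v : Int × Int → Int) (m0 : Int) :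
    dirs.foldl (fun (m : Int) d => if cond d then (if v d < m then v d else m) else m) m0 ≤ m0 ∧
    (∀ d ∈ dirs, cond d = true →
      dirs.foldl (fun (m : Int) d => if cond d then (if v d < m then v d else m) else m) m0 ≤ v d) ∧
    (dirs.foldl (fun (m : Int) d => if cond d then (if v d < m then v d else m) else m) m0 = m0 ∨
      ∃ d ∈ dirs, cond d = true ∧
        dirs.foldl (fun (m : Int) d => if cond d then (if v d < m then v d else m) else m) m0 = v d) := by
  induction dirs generalizing m0 with
  | nil => exact ⟨le_refl _, fun d hd => absurd hd (by simp), Or.inl rfl⟩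
  | cons d0 rest ih =>
    rw [List.foldl_cons]
    set m1 : Int := if cond d0 then (if v d0 < m0 then v d0 else m0) else m0 with hm1
    obtain ⟨ih1, ih2, ih3⟩ := ih m1
    have hm1le : m1 ≤ m0 := by
      rw [hm1]
      split
      · split <;> omega
      · omega
    have hm1v : cond d0 = true → m1 ≤ v d0 := by
      intro hcv
      rw [hm1, if_pos hcv]
      split <;> omega
    refine ⟨le_trans ih1 hm1le, ?_, ?_⟩
    · intro d hd hcv
      rcases List.mem_cons.mp hd with rfl | hd'
      · exact le_trans ih1 (hm1v hcv)
      · exact ih2 d hd' hcv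
    · rcases ih3 with h | ⟨d, hd, hcv, hval⟩
      · rw [h, hm1]
        by_cases hcv : cond d0 = true
        · rw [if_pos hcv]
          by_cases hlt : v d0 < m0
          · rw [if_pos hlt]
            exact Or.inr ⟨d0, List.mem_cons_self, hcv, rfl⟩
          · rw [if_neg hlt]
            exact Or.inl rfl
        · rw [if_neg hcv]
          exact Or.inl rfl
      · exact Or.inr ⟨d, List.mem_cons_of_mem _ hd, hcv, hval⟩

theorem pv_sum_toNat_le (l l' : List Int) (hlen : l'.length = l.length)
    (hle : ∀ k : Nat, k < l.length → l'.getD k 0 ≤ l.getD k 0)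
    (hnn : ∀ x ∈ l', 0 ≤ x) :
    (l'.map Int.toNat).sum ≤ (l.map Int.toNat).sum := by
  induction l generalizing l' with
  | nil =>
    rw [List.length_nil, List.length_eq_zero_iff] at hlen
    subst hlen
    simp
  | cons a t ih =>
    rcases l' with _ | ⟨a', t'⟩
    · simp
    · have h0 := hle 0 (by simp)
      simp only [List.getD_cons_zero] at h0
      have ha' : 0 ≤ a' := hnn a' List.mem_cons_self
      have iht := ih t' (by simpa using hlen)
        (fun k hk => by simpa using hle (k+1) (by simpa using Nat.succ_lt_succ hk))
        (fun x hx => hnn x (List.mem_cons_of_mem _ hx))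
      simp only [List.map_cons, List.sum_cons]
      have : a'.toNat ≤ a.toNat := by omega
      omega

theorem pv_sum_toNat_lt (l l' : List Int) (hlen : l'.length = l.length)
    (hle : ∀ k : Nat, k < l.length → l'.getD k 0 ≤ l.getD k 0)
    (hnn : ∀ x ∈ l', 0 ≤ x)
    (hstrict : ∃ k : Nat, k < l.length ∧ l'.getD k 0 < l.getD k 0) :
    (l'.map Int.toNat).sum < (l.map Int.toNat).sum := by
  induction l generalizing l' with
  | nil =>
    obtain ⟨k, hk, _⟩ := hstrict
    simp at hk
  | cons a t ih =>
    rcases l' with _ | ⟨a', t'⟩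
    · simp at hlen
    · have h0 := hle 0 (by simp)
      simp only [List.getD_cons_zero] at h0
      have ha' : 0 ≤ a' := hnn a' List.mem_cons_self
      have hlen' : t'.length = t.length := by simpa using hlen
      have hle' : ∀ k : Nat, k < t.length → t'.getD k 0 ≤ t.getD k 0 :=
        fun k hk => by simpa using hle (k+1) (by simpa using Nat.succ_lt_succ hk)
      have hnn' : ∀ x ∈ t', 0 ≤ x := fun x hx => hnn x (List.mem_cons_of_mem _ hx)
      obtain ⟨k, hk, hklt⟩ := hstrict
      simp only [List.map_cons, List.sum_cons]
      rcases k with _ | k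
      · simp only [List.getD_cons_zero] at hklt
        have h1 : a'.toNat < a.toNat := by omega
        have h2 := pv_sum_toNat_le t t' hlen' hle' hnn'
        omega
      · have hkt : k < t.length := by simpa using hk
        have hklt' : t'.getD k 0 < t.getD k 0 := by simpa using hklt
        have h2 := ih t' hlen' hle' hnn' ⟨k, hkt, hklt'⟩
        have h1 : a'.toNat ≤ a.toNat := by omega
        omega

theorem pv_round_core (garden : List String) (label : List Int)
    (hlen0 : label.length = (pvN garden).toNat)
    (hval0 : ∀ c, pvInB garden c = true → ∃ e, pvInB garden e = true ∧ pvReach garden c e ∧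
      PySem.List.pyGetD label (pvIdx garden c) 0 = pvIdx garden e)
    (f : (List Int × Bool) → Int → (List Int × Bool))
    (hf : ∀ (st : List Int × Bool) (i : Int), f st i =
      if (pvDirs4.foldl (fun (m : Int) d =>
        if pvCheckInGarden (PySem.Int.floordiv i (pvWl garden) + d.1)
              (PySem.Int.mod i (pvWl garden) + d.2) garden
            && (pvPlantAt garden (PySem.Int.floordiv i (pvWl garden) + d.1)
                  (PySem.Int.mod i (pvWl garden) + d.2)
                == pvPlantAt garden (PySem.Int.floordiv i (pvWl garden))
                    (PySem.Int.mod i (pvWl garden))) then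
          (if PySem.List.pyGetD st.1 ((PySem.Int.floordiv i (pvWl garden) + d.1) * pvWl garden
                + (PySem.Int.mod i (pvWl garden) + d.2)) 0 < m
           then PySem.List.pyGetD st.1 ((PySem.Int.floordiv i (pvWl garden) + d.1) * pvWl garden
                + (PySem.Int.mod i (pvWl garden) + d.2)) 0 else m)
        else m) (PySem.List.pyGetD st.1 i 0)) < PySem.List.pyGetD st.1 i 0
      then (PySem.List.pySetD st.1 i (pvDirs4.foldl (fun (m : Int) d =>
        if pvCheckInGarden (PySem.Int.floordiv i (pvWl garden) + d.1)
              (PySem.Int.mod i (pvWl garden) + d.2) garden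
            && (pvPlantAt garden (PySem.Int.floordiv i (pvWl garden) + d.1)
                  (PySem.Int.mod i (pvWl garden) + d.2)
                == pvPlantAt garden (PySem.Int.floordiv i (pvWl garden))
                    (PySem.Int.mod i (pvWl garden))) then
          (if PySem.List.pyGetD st.1 ((PySem.Int.floordiv i (pvWl garden) + d.1) * pvWl garden
                + (PySem.Int.mod i (pvWl garden) + d.2)) 0 < m
           then PySem.List.pyGetD st.1 ((PySem.Int.floordiv i (pvWl garden) + d.1) * pvWl garden
                + (PySem.Int.mod i (pvWl garden) + d.2)) 0 else m)
        else m) (PySem.List.pyGetD st.1 i 0)), true)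
      else st) :
    ((PySem.List.pyRange 0 (pvN garden) 1).foldl f (label, false)).1.length = (pvN garden).toNat ∧
    (∀ c, pvInB garden c = true → ∃ e, pvInB garden e = true ∧ pvReach garden c e ∧
      PySem.List.pyGetD ((PySem.List.pyRange 0 (pvN garden) 1).foldl f (label, false)).1
        (pvIdx garden c) 0 = pvIdx garden e) ∧
    (((PySem.List.pyRange 0 (pvN garden) 1).foldl f (label, false)).2 = false →
      ((PySem.List.pyRange 0 (pvN garden) 1).foldl f (label, false)).1 = label ∧
      pvLocalFix garden label) ∧
    (((PySem.List.pyRange 0 (pvN garden) 1).foldl f (label, false)).2 = true →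
      ((((PySem.List.pyRange 0 (pvN garden) 1).foldl f (label, false)).1.map Int.toNat).sum <
        (label.map Int.toNat).sum)) := by
  have hn0 : 0 ≤ pvN garden := by
    unfold pvN pvWl
    rw [PySem.List.len_eq, PySem.Str.len_eq]
    positivity
  have hsetget : ∀ (xs : List Int) (j m' k : Int), 0 ≤ j → j < pvN garden →
      xs.length = (pvN garden).toNat → 0 ≤ k → k < pvN garden →
      PySem.List.pyGetD (PySem.List.pySetD xs j m') k 0 =
        if k = j then m' else PySem.List.pyGetD xs k 0 := by
    intro xs j m' k hj0 hjn hl hk0 hkn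
    have hj : j = ((j.toNat : Nat) : Int) := (Int.toNat_of_nonneg hj0).symm
    have hk : k = ((k.toNat : Nat) : Int) := (Int.toNat_of_nonneg hk0).symm
    rw [hj, hk, PySem.List.pyGetD_pySetD_natCast xs j.toNat k.toNat m' 0 (by omega)]
    by_cases h : k.toNat = j.toNat
    · rw [if_pos h, if_pos (by exact_mod_cast congrArg (Nat.cast : Nat → Int) h)]
    · rw [if_neg h, if_neg (by omega)]
  set P : (List Int × Bool) → Prop := fun st =>
    st.1.length = (pvN garden).toNat ∧
    (∀ c, pvInB garden c = true → ∃ e, pvInB garden e = true ∧ pvReach garden c e ∧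
      PySem.List.pyGetD st.1 (pvIdx garden c) 0 = pvIdx garden e) ∧
    (∀ k : Int, 0 ≤ k → k < pvN garden →
      PySem.List.pyGetD st.1 k 0 ≤ PySem.List.pyGetD label k 0) ∧
    (st.2 = false → st.1 = label) ∧
    (st.2 = true → ∃ k : Int, 0 ≤ k ∧ k < pvN garden ∧
      PySem.List.pyGetD st.1 k 0 < PySem.List.pyGetD label k 0) with hP
  have hstep : ∀ (st : List Int × Bool) (i : Int), 0 ≤ i → i < pvN garden → P st → P (f st i) := by
    intro st i hi0 hin hPst
    obtain ⟨h1, h2, h3, h4, h5⟩ := hPst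
    obtain ⟨hcInB, hcidx⟩ := pv_cellOf_spec garden i hi0 hin
    obtain ⟨hm1, hm2, hm3⟩ := pv_minfold_spec pvDirs4
      (fun d => pvCheckInGarden (PySem.Int.floordiv i (pvWl garden) + d.1)
              (PySem.Int.mod i (pvWl garden) + d.2) garden
            && (pvPlantAt garden (PySem.Int.floordiv i (pvWl garden) + d.1)
                  (PySem.Int.mod i (pvWl garden) + d.2)
                == pvPlantAt garden (PySem.Int.floordiv i (pvWl garden))
                    (PySem.Int.mod i (pvWl garden))))
      (fun d => PySem.List.pyGetD st.1 ((PySem.Int.floordiv i (pvWl garden) + d.1) * pvWl garden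
                + (PySem.Int.mod i (pvWl garden) + d.2)) 0)
      (PySem.List.pyGetD st.1 i 0)
    rw [hP]
    rw [hf st i]
    split
    · rename_i hlt
      refine ⟨?_, ?_, ?_, ?_, ?_⟩
      · rw [PySem.List.length_pySetD]
        exact h1
      · intro c hc
        obtain ⟨hj0, hjn, hjc⟩ := pv_idx_bounds garden c hc
        rw [hsetget st.1 i _ (pvIdx garden c) hi0 hin h1 hj0 hjn]
        by_cases hji : pvIdx garden c = i
        · rw [if_pos hji]
          have hcc : pvCellOf garden i = c := by rw [← hji, hjc]
          rcases hm3 with hF | ⟨d, hd, hcond, hFv⟩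
          · omega
          · have hx : PySem.Int.floordiv i (pvWl garden) = c.1 := congrArg Prod.fst hcc
            have hy : PySem.Int.mod i (pvWl garden) = c.2 := congrArg Prod.snd hcc
            rw [hx, hy] at hcond hFv ⊢
            have hadj : pvAdjB garden c (c.1 + d.1, c.2 + d.2) = true :=
              pv_adjB_of_dir' garden c hc d hd hcond
            have hnbInB : pvInB garden (c.1 + d.1, c.2 + d.2) = true :=
              (pv_adjB_inB garden _ _ hadj).2
            have hnb : (c.1 + d.1) * pvWl garden + (c.2 + d.2) =
                pvIdx garden (c.1 + d.1, c.2 + d.2) := rfl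
            rw [hnb] at hFv
            obtain ⟨e, heInB, her, hev⟩ := h2 _ hnbInB
            exact ⟨e, heInB,
              Relation.ReflTransGen.trans (Relation.ReflTransGen.single hadj) her,
              by rw [hFv, hev]⟩
        · rw [if_neg hji]
          exact h2 c hc
      · intro k hk0 hkn
        rw [hsetget st.1 i _ k hi0 hin h1 hk0 hkn]
        by_cases hki : k = i
        · rw [if_pos hki]
          have := h3 i hi0 hin
          subst hki
          omega
        · rw [if_neg hki]
          exact h3 k hk0 hkn
      · intro h
        simp at h
      · intro _
        refine ⟨i, hi0, hin, ?_⟩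
        rw [hsetget st.1 i _ i hi0 hin h1 hi0 hin, if_pos rfl]
        have := h3 i hi0 hin
        omega
    · exact ⟨h1, h2, h3, h4, h5⟩
  have hfold : ∀ (l : List Int), (∀ i ∈ l, 0 ≤ i ∧ i < pvN garden) →
      ∀ st, P st → P (l.foldl f st) := by
    intro l
    induction l with
    | nil => exact fun _ st h => h
    | cons i t ih =>
      intro hb st h
      rw [List.foldl_cons]
      exact ih (fun j hj => hb j (List.mem_cons_of_mem _ hj)) _
        (hstep st i (hb i List.mem_cons_self).1 (hb i List.mem_cons_self).2 h)
  have hsnd : ∀ (st : List Int × Bool) (i : Int), st.2 = true → (f st i).2 = true := by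
    intro st i h
    rw [hf st i]
    split
    · rfl
    · exact h
  have hmono : ∀ (l : List Int) (st : List Int × Bool), st.2 = true →
      (l.foldl f st).2 = true := by
    intro l
    induction l with
    | nil => exact fun st h => h
    | cons i t ih =>
      intro st h
      rw [List.foldl_cons]
      exact ih _ (hsnd st i h)
  have hkey : ∀ (st : List Int × Bool) (i : Int), (f st i).2 = false → f st i = st := by
    intro st i h
    rw [hf st i] at h ⊢
    split at h
    · simp at h
    · rename_i hcond
      rw [if_neg hcond]
  have hfixlem : ∀ (l : List Int), (∀ i ∈ l, 0 ≤ i ∧ i < pvN garden) →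
      (l.foldl f (label, false)).2 = false →
      (l.foldl f (label, false)).1 = label ∧
      ∀ i ∈ l, ∀ d ∈ pvDirs4,
        (pvCheckInGarden (PySem.Int.floordiv i (pvWl garden) + d.1)
              (PySem.Int.mod i (pvWl garden) + d.2) garden
            && (pvPlantAt garden (PySem.Int.floordiv i (pvWl garden) + d.1)
                  (PySem.Int.mod i (pvWl garden) + d.2)
                == pvPlantAt garden (PySem.Int.floordiv i (pvWl garden))
                    (PySem.Int.mod i (pvWl garden)))) = true →
        PySem.List.pyGetD label i 0 ≤ PySem.List.pyGetD label
          ((PySem.Int.floordiv i (pvWl garden) + d.1) * pvWl garden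
                + (PySem.Int.mod i (pvWl garden) + d.2)) 0 := by
    intro l
    induction l with
    | nil =>
      intro _ _
      exact ⟨rfl, by simp⟩
    | cons i t ih =>
      intro hb hfalse
      rw [List.foldl_cons] at hfalse ⊢
      have hb2 : (f (label, false) i).2 = false := by
        cases hb2 : (f (label, false) i).2
        · rfl
        · rw [hmono t _ hb2] at hfalse
          exact absurd hfalse (by simp)
      have hstate : f (label, false) i = (label, false) := hkey _ _ hb2
      have hnlt := hb2
      rw [hf (label, false) i] at hnlt
      rw [hstate] at hfalse ⊢
      obtain ⟨ih1, ih2⟩ := ih (fun j hj => hb j (List.mem_cons_of_mem _ hj)) hfalse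
      refine ⟨ih1, ?_⟩
      intro j hj d hd hg
      rcases List.mem_cons.mp hj with rfl | hj'
      · -- head: extract the no-decrease fact
        dsimp only at hnlt
        split at hnlt
        · simp at hnlt
        · rename_i hge
          obtain ⟨hm1, hm2, hm3⟩ := pv_minfold_spec pvDirs4
            (fun d => pvCheckInGarden (PySem.Int.floordiv j (pvWl garden) + d.1)
                (PySem.Int.mod j (pvWl garden) + d.2) garden
              && (pvPlantAt garden (PySem.Int.floordiv j (pvWl garden) + d.1)
                    (PySem.Int.mod j (pvWl garden) + d.2)
                  == pvPlantAt garden (PySem.Int.floordiv j (pvWl garden))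
                      (PySem.Int.mod j (pvWl garden))))
            (fun d => PySem.List.pyGetD label ((PySem.Int.floordiv j (pvWl garden) + d.1) * pvWl garden
                + (PySem.Int.mod j (pvWl garden) + d.2)) 0)
            (PySem.List.pyGetD label j 0)
          beta_reduce at hm1 hm2 hm3
          have hle := hm2 d hd hg
          omega
      · exact ih2 j hj' d hd hg
  have hb : ∀ i ∈ PySem.List.pyRange 0 (pvN garden) 1, 0 ≤ i ∧ i < pvN garden := by
    intro i hi
    rw [PySem.List.mem_pyRange_one] at hi
    omega
  have hPinit : P (label, false) := by
    rw [hP]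
    exact ⟨hlen0, hval0, fun k _ _ => le_refl _, fun _ => rfl, by simp⟩
  have hPfin := hfold _ hb (label, false) hPinit
  rw [hP] at hPfin
  obtain ⟨c1, c2, c3, c4, c5⟩ := hPfin
  refine ⟨c1, c2, ?_, ?_⟩
  · intro hch
    refine ⟨c4 hch, ?_⟩
    obtain ⟨_, hfix⟩ := hfixlem _ hb hch
    intro a b hadj
    have haInB : pvInB garden a = true := (pv_adjB_inB garden _ _ hadj).1
    obtain ⟨hj0, hjn, hjc⟩ := pv_idx_bounds garden a haInB
    obtain ⟨dir, hdir, heq, hguard⟩ := pv_adjB_dest' garden a b hadj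
    have hiR : pvIdx garden a ∈ PySem.List.pyRange 0 (pvN garden) 1 :=
      (PySem.List.mem_pyRange_one).mpr ⟨hj0, hjn⟩
    have hx : PySem.Int.floordiv (pvIdx garden a) (pvWl garden) = a.1 := congrArg Prod.fst hjc
    have hy : PySem.Int.mod (pvIdx garden a) (pvWl garden) = a.2 := congrArg Prod.snd hjc
    have hfi := hfix (pvIdx garden a) hiR dir hdir
    rw [hx, hy] at hfi
    subst heq
    dsimp only at hguard
    have := hfi hguard
    exact this
  · intro hch
    obtain ⟨k, hk0, hkn, hklt⟩ := c5 hch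
    apply pv_sum_toNat_lt label _ (by rw [c1, hlen0]) ?hle ?hnn ?hstrict
    case hle =>
      intro j hjlen
      have hj := c3 (j : Int) (by omega) (by omega)
      rwa [PySem.List.pyGetD_natCast, PySem.List.pyGetD_natCast] at hj
    case hnn =>
      intro x hx
      obtain ⟨j, hjl, rfl⟩ := List.mem_iff_getElem.mp hx
      have hjN : j < (pvN garden).toNat := by omega
      obtain ⟨hcInB, hcidx⟩ := pv_cellOf_spec garden (j : Int) (by omega) (by omega)
      obtain ⟨e, _, _, hev⟩ := c2 _ hcInB
      rw [hcidx] at hev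
      rw [PySem.List.pyGetD_natCast] at hev
      rw [List.getD_eq_getElem _ _ hjl] at hev
      rw [hev]
      exact (pv_idx_bounds garden e (by assumption)).1
    case hstrict =>
      refine ⟨k.toNat, by omega, ?_⟩
      have hkk : ((k.toNat : Nat) : Int) = k := Int.toNat_of_nonneg hk0
      rw [← PySem.List.pyGetD_natCast (((PySem.List.pyRange 0 (pvN garden) 1).foldl f
        (label, false)).1) k.toNat, ← PySem.List.pyGetD_natCast label k.toNat, hkk]
      exact hklt

set_option maxHeartbeats 1000000 in
theorem pv_round_spec (garden : List String) (_hPre : Pre_calc_discounted_cost garden)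
    (label : List Int) (hV : pvValid garden label) :
    pvValid garden (pvRound garden (pvWl garden) (pvN garden) label).1 ∧
    ((pvRound garden (pvWl garden) (pvN garden) label).2 = false →
      (pvRound garden (pvWl garden) (pvN garden) label).1 = label ∧ pvLocalFix garden label) ∧
    ((pvRound garden (pvWl garden) (pvN garden) label).2 = true →
      ((pvRound garden (pvWl garden) (pvN garden) label).1.map Int.toNat).sum <
        (label.map Int.toNat).sum) := by
  obtain ⟨hlen0, hval0⟩ := hV
  have heq : pvRound garden (pvWl garden) (pvN garden) label =
      (PySem.List.pyRange 0 (pvN garden) 1).foldl (fun st i =>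
      if (pvDirs4.foldl (fun (m : Int) d =>
        if pvCheckInGarden (PySem.Int.floordiv i (pvWl garden) + d.1)
              (PySem.Int.mod i (pvWl garden) + d.2) garden
            && (pvPlantAt garden (PySem.Int.floordiv i (pvWl garden) + d.1)
                  (PySem.Int.mod i (pvWl garden) + d.2)
                == pvPlantAt garden (PySem.Int.floordiv i (pvWl garden))
                    (PySem.Int.mod i (pvWl garden))) then
          (if PySem.List.pyGetD st.1 ((PySem.Int.floordiv i (pvWl garden) + d.1) * pvWl garden
                + (PySem.Int.mod i (pvWl garden) + d.2)) 0 < m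
           then PySem.List.pyGetD st.1 ((PySem.Int.floordiv i (pvWl garden) + d.1) * pvWl garden
                + (PySem.Int.mod i (pvWl garden) + d.2)) 0 else m)
        else m) (PySem.List.pyGetD st.1 i 0)) < PySem.List.pyGetD st.1 i 0
      then (PySem.List.pySetD st.1 i (pvDirs4.foldl (fun (m : Int) d =>
        if pvCheckInGarden (PySem.Int.floordiv i (pvWl garden) + d.1)
              (PySem.Int.mod i (pvWl garden) + d.2) garden
            && (pvPlantAt garden (PySem.Int.floordiv i (pvWl garden) + d.1)
                  (PySem.Int.mod i (pvWl garden) + d.2)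
                == pvPlantAt garden (PySem.Int.floordiv i (pvWl garden))
                    (PySem.Int.mod i (pvWl garden))) then
          (if PySem.List.pyGetD st.1 ((PySem.Int.floordiv i (pvWl garden) + d.1) * pvWl garden
                + (PySem.Int.mod i (pvWl garden) + d.2)) 0 < m
           then PySem.List.pyGetD st.1 ((PySem.Int.floordiv i (pvWl garden) + d.1) * pvWl garden
                + (PySem.Int.mod i (pvWl garden) + d.2)) 0 else m)
        else m) (PySem.List.pyGetD st.1 i 0)), true)
      else st)
      (label, false) := rfl
  rw [heq]
  have hcore := pv_round_core garden label hlen0 hval0 _ (fun st i => rfl)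
  exact ⟨⟨hcore.1, hcore.2.1⟩, hcore.2.2.1, hcore.2.2.2⟩

theorem pv_propagate_spec (garden : List String) (hPre : Pre_calc_discounted_cost garden) :
    ∀ (fuel : Nat) (label : List Int), pvValid garden label →
    (label.map Int.toNat).sum < fuel →
    pvValid garden (pvPropagate garden (pvWl garden) (pvN garden) fuel label) ∧
    pvLocalFix garden (pvPropagate garden (pvWl garden) (pvN garden) fuel label) := by
  intro fuel
  induction fuel with
  | zero =>
    intro label _ hsum
    omega
  | succ fuel ih =>
    intro label hV hsum
    obtain ⟨hVr, hfixr, hsumr⟩ := pv_round_spec garden hPre label hV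
    rw [pv_propagate_round]
    cases hch : (pvRound garden (pvWl garden) (pvN garden) label).2
    · simp only [Bool.false_eq_true, if_false]
      obtain ⟨heq, hfix⟩ := hfixr hch
      rw [heq]
      exact ⟨hV, hfix⟩
    · simp only [if_true]
      exact ih _ hVr (by have := hsumr hch; omega)

theorem pv_label_iff (garden : List String) (label : List Int)
    (hV : pvValid garden label) (hF : pvLocalFix garden label)
    {c d : Int × Int} (hc : pvInB garden c = true) (hd : pvInB garden d = true) :
    (PySem.List.pyGetD label (pvIdx garden c) 0 = PySem.List.pyGetD label (pvIdx garden d) 0)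
      ↔ pvReach garden c d := by
  obtain ⟨hlen, hval⟩ := hV
  constructor
  · intro h
    obtain ⟨e, heInB, her, hev⟩ := hval c hc
    obtain ⟨e', heInB', her', hev'⟩ := hval d hd
    have : pvIdx garden e = pvIdx garden e' := by rw [← hev, ← hev', h]
    have hee : e = e' := pv_idx_inj garden heInB heInB' this
    subst hee
    exact Relation.ReflTransGen.trans her (pv_reach_symm garden her')
  · intro h
    have hstep : ∀ a b : Int × Int, pvAdjB garden a b = true →
        PySem.List.pyGetD label (pvIdx garden a) 0 = PySem.List.pyGetD label (pvIdx garden b) 0 := by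
      intro a b hab
      have h1 := hF a b hab
      have h2 := hF b a (by rw [pv_adjB_symm]; exact hab)
      omega
    induction h with
    | refl => rfl
    | tail hcb hadj ih => rw [ih (pv_reach_inB garden hc hcb), hstep _ _ hadj]

theorem pv_label0_valid (garden : List String) :
    pvValid garden (PySem.List.pyRange 0 (pvN garden) 1) := by
  constructor
  · rw [PySem.List.length_pyRange_one]
    omega
  · intro c hc
    obtain ⟨h0, h1, _⟩ := pv_idx_bounds garden c hc
    refine ⟨c, hc, Relation.ReflTransGen.refl, ?_⟩
    have hj : pvIdx garden c = ((pvIdx garden c).toNat : Int) := (Int.toNat_of_nonneg h0).symm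
    rw [hj, PySem.List.pyGetD_natCast]
    have hk : (pvIdx garden c).toNat < (PySem.List.pyRange 0 (pvN garden) 1).length := by
      rw [PySem.List.length_pyRange_one]
      omega
    rw [List.getD_eq_getElem _ _ hk, PySem.List.getElem_pyRange_one]
    omega

theorem pv_label0_sum (garden : List String) :
    (((PySem.List.pyRange 0 (pvN garden) 1)).map Int.toNat).sum <
      (pvN garden * pvN garden + 1).toNat := by
  have hn0 : 0 ≤ pvN garden := by
    unfold pvN pvWl
    rw [PySem.List.len_eq, PySem.Str.len_eq]
    positivity
  have hbound : ∀ x ∈ (PySem.List.pyRange 0 (pvN garden) 1).map Int.toNat,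
      x ≤ (pvN garden).toNat := by
    intro x hx
    rw [List.mem_map] at hx
    obtain ⟨i, hi, rfl⟩ := hx
    rw [PySem.List.mem_pyRange_one] at hi
    omega
  have hsum := List.sum_le_card_nsmul _ _ hbound
  rw [List.length_map, PySem.List.length_pyRange_one, smul_eq_mul] at hsum
  have htn : (pvN garden * pvN garden + 1).toNat = (pvN garden).toNat * (pvN garden).toNat + 1 := by
    obtain ⟨m, hm⟩ := Int.eq_ofNat_of_zero_le hn0
    rw [hm]
    have hcast : ((m : Int) * m + 1) = ((m * m + 1 : Nat) : Int) := by push_cast; ring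
    rw [hcast, Int.toNat_natCast, Int.toNat_natCast]
  have h00 : (pvN garden - 0).toNat = (pvN garden).toNat := by omega
  rw [h00] at hsum
  rw [htn]
  omega

def pvAreaDict (garden : List String) (label : List Int) : PySem.Dict Int Int :=
  (PySem.List.pyRange 0 (pvN garden) 1).foldl (fun d i =>
      PySem.Dict.modify d (PySem.List.pyGetD label i 0) 0 (fun v => v + 1)) PySem.Dict.empty

theorem pv_area_eq_compSize (garden : List String) (_hPre : Pre_calc_discounted_cost garden)
    (label : List Int) (hV : pvValid garden label) (hF : pvLocalFix garden label)
    (c : Int × Int) (hc : pvInB garden c = true) :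
    PySem.Dict.getD (pvAreaDict garden label) (PySem.List.pyGetD label (pvIdx garden c) 0) 0 =
      pvCompSize garden c := by
  have harea : ∀ (l : List Int) (dct : PySem.Dict Int Int) (v : Int),
      PySem.Dict.getD (l.foldl (fun d i =>
        PySem.Dict.modify d (PySem.List.pyGetD label i 0) 0 (fun v => v + 1)) dct) v 0 =
      PySem.Dict.getD dct v 0 + ((l.map (fun i => PySem.List.pyGetD label i 0)).count v : Int) := by
    intro l
    induction l with
    | nil =>
      intro dct v
      simp
    | cons i t ih =>
      intro dct v
      rw [List.foldl_cons, ih, List.map_cons]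
      have hone := PySem.Dict.getD_foldl_modify_add_one [PySem.List.pyGetD label i 0] dct v
      rw [List.foldl_cons, List.foldl_nil] at hone
      rw [hone]
      have hcnt : (PySem.List.pyGetD label i 0 :: t.map (fun i => PySem.List.pyGetD label i 0)).count v =
          (t.map (fun i => PySem.List.pyGetD label i 0)).count v +
            List.count v [PySem.List.pyGetD label i 0] := by
        by_cases hv : PySem.List.pyGetD label i 0 = v
        · subst hv
          simp
        · simp [hv]
      rw [hcnt]
      push_cast
      ring
  have hmain := harea (PySem.List.pyRange 0 (pvN garden) 1) PySem.Dict.empty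
    (PySem.List.pyGetD label (pvIdx garden c) 0)
  have hempty : PySem.Dict.getD (PySem.Dict.empty : PySem.Dict Int Int)
      (PySem.List.pyGetD label (pvIdx garden c) 0) 0 = 0 := by
    simp [pysem]
  rw [pvAreaDict, hmain, hempty, zero_add]
  -- count = component size
  have hcount : ((PySem.List.pyRange 0 (pvN garden) 1).map
      (fun i => PySem.List.pyGetD label i 0)).count (PySem.List.pyGetD label (pvIdx garden c) 0) =
      (pvCompList garden c).length := by
    rw [List.count_eq_countP, List.countP_map]
    unfold pvCompList
    rw [← List.countP_eq_length_filter]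
    have hswap : List.countP
        (fun d => (pvSat garden c (pvCells garden).length).contains d) (pvCells garden) =
        List.countP (fun d => (pvSat garden c (pvCells garden).length).contains d)
          ((PySem.List.pyRange 0 (pvN garden) 1).map (pvCellOf garden)) := by
      rw [pv_cells_eq_map garden]
    rw [hswap, List.countP_map]
    apply List.countP_congr
    intro i hi
    rw [PySem.List.mem_pyRange_one] at hi
    obtain ⟨hiInB, hidx⟩ := pv_cellOf_spec garden i hi.1 hi.2
    have hlbl : (PySem.List.pyGetD label i 0 = PySem.List.pyGetD label (pvIdx garden c) 0) ↔
        pvReach garden (pvCellOf garden i) c := by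
      have hli := pv_label_iff garden label hV hF hiInB hc
      rwa [hidx] at hli
    have hsat : ((pvSat garden c (pvCells garden).length).contains (pvCellOf garden i) = true) ↔
        pvReach garden (pvCellOf garden i) c := by
      rw [List.contains_eq_mem, decide_eq_true_eq, pv_satMem_iff garden c hc]
      exact ⟨fun h => pv_reach_symm garden h, fun h => pv_reach_symm garden h⟩
    simp only [Function.comp_apply]
    rw [Bool.eq_iff_iff, beq_iff_eq]
    rw [hlbl, ← hsat]
    simp
  rw [hcount]
  rfl

theorem pv_B_eq_spec (garden : List String) (hPre : Pre_calc_discounted_cost garden) :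
    calc_discounted_cost_alt garden = pvSpecTotal garden := by
  by_cases hemp : garden = []
  · subst hemp
    rfl
  · unfold calc_discounted_cost_alt
    rw [if_neg hemp]
    dsimp only []
    have hN : PySem.List.len garden * PySem.Str.len (garden.headD "") = pvN garden := rfl
    rw [hN]
    have hW : PySem.Str.len (garden.headD "") = pvWl garden := rfl
    rw [hW]
    set lbl := pvPropagate garden (pvWl garden) (pvN garden)
      (pvN garden * pvN garden + 1).toNat (PySem.List.pyRange 0 (pvN garden) 1) with hlbl
    obtain ⟨hV, hF⟩ := pv_propagate_spec garden hPre
      (pvN garden * pvN garden + 1).toNat (PySem.List.pyRange 0 (pvN garden) 1)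
      (pv_label0_valid garden) (pv_label0_sum garden)
    have hA : (PySem.List.pyRange 0 (pvN garden) 1).foldl (fun d i =>
        PySem.Dict.modify d (PySem.List.pyGetD lbl i 0) 0 (fun v => v + 1))
        PySem.Dict.empty = pvAreaDict garden lbl := rfl
    rw [hA]
    have hfa := PySem.List.foldl_add (PySem.List.pyRange 0 (pvN garden) 1)
      (fun i => pvGetCorners (PySem.Int.floordiv i (pvWl garden)) (PySem.Int.mod i (pvWl garden))
          garden ((pvPlantAt garden (PySem.Int.floordiv i (pvWl garden))
            (PySem.Int.mod i (pvWl garden))).getD default)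
        * PySem.Dict.getD (pvAreaDict garden lbl) (PySem.List.pyGetD lbl i 0) 0) 0
    beta_reduce at hfa
    rw [hfa, zero_add]
    unfold pvSpecTotal
    rw [← pv_cells_eq_map garden, List.map_map]
    refine congrArg List.sum (List.map_congr_left ?_)
    intro i hi
    rw [PySem.List.mem_pyRange_one] at hi
    obtain ⟨hiInB, hidx⟩ := pv_cellOf_spec garden i hi.1 hi.2
    have harea := pv_area_eq_compSize garden hPre lbl hV hF (pvCellOf garden i) hiInB
    rw [hidx] at harea
    simp only [Function.comp_apply]
    have hcor : pvCorners garden (pvCellOf garden i) =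
        pvGetCorners (PySem.Int.floordiv i (pvWl garden)) (PySem.Int.mod i (pvWl garden))
          garden ((pvPlantAt garden (PySem.Int.floordiv i (pvWl garden))
            (PySem.Int.mod i (pvWl garden))).getD default) := rfl
    rw [← hcor, harea]

-- ===== VERDICT (by name: the statement is the Claim_ definition above) =====
theorem calc_discounted_cost_spec : Claim_equal_calc_discounted_cost := by
  intro garden _ hPre
  unfold Spec_calc_discounted_cost
  rw [pv_A_eq_spec garden hPre, pv_B_eq_spec garden hPre]
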